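-- pv_equiv track=rewrite | github.com/GitMonsters/octotetrahedral-agi | re_arc_bench_solves/00b24745.py | transform
-- ===== SOURCE A (Python) =====
-- def transform(grid):
--     """
--     Pattern: Find rectangular clusters of a 'marker' color. Within each cluster's
--     bounding box, replace a specific 'target' background color with 0 (black).
--     """
--     import copy
--
--     rows = len(grid)
--     cols = len(grid[0])
--     result = copy.deepcopy(grid)
--
--     # Count colors
--     color_counts = {}
--     for r in range(rows):
--         for c in range(cols):
--             v = grid[r][c]
--             color_counts[v] = color_counts.get(v, 0) + 1
--
--     # Get the 3 main colors
--     colors = sorted(color_counts.keys(), key=lambda x: -color_counts[x])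
--     if len(colors) < 3:
--         return result
--
--     # The marker color is the least frequent, target is medium
--     marker_color = colors[2]
--     target_color = colors[1]  # This will be replaced with 0 inside boxes
--
--     # Find connected components of marker color
--     visited = [[False]*cols for _ in range(rows)]
--
--     def flood_fill(r, c):
--         """Find all cells in this connected component"""
--         stack = [(r, c)]
--         cells = []
--         while stack:
--             cr, cc = stack.pop()
--             if cr < 0 or cr >= rows or cc < 0 or cc >= cols:
--                 continue
--             if visited[cr][cc] or grid[cr][cc] != marker_color:
--                 continue
--             visited[cr][cc] = True
--             cells.append((cr, cc))
--             # 4-connectivity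
--             stack.extend([(cr-1, cc), (cr+1, cc), (cr, cc-1), (cr, cc+1)])
--         return cells
--
--     # Find all components and their bounding boxes
--     components = []
--     for r in range(rows):
--         for c in range(cols):
--             if grid[r][c] == marker_color and not visited[r][c]:
--                 cells = flood_fill(r, c)
--                 if cells:
--                     min_r = min(x[0] for x in cells)
--                     max_r = max(x[0] for x in cells)
--                     min_c = min(x[1] for x in cells)
--                     max_c = max(x[1] for x in cells)
--                     components.append((min_r, max_r, min_c, max_c))
--
--     # Within each bounding box, replace target_color with 0
--     for min_r, max_r, min_c, max_c in components:
--         for r in range(min_r, max_r + 1):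
--             for c in range(min_c, max_c + 1):
--                 if result[r][c] == target_color:
--                     result[r][c] = 0
--
--     return result
-- ===== SOURCE B (Python) =====
-- def transform(grid):
--     """Union-find over flat cell indices (right/down unions, attach-to-smaller-root)
--     replaces A's DFS flood fill; components are grouped by DSU root in scan order."""
--     rows = len(grid)
--     cols = len(grid[0])
--     result = [list(row) for row in grid]
--
--     color_counts = {}
--     for r in range(rows):
--         for c in range(cols):
--             v = grid[r][c]
--             color_counts[v] = color_counts.get(v, 0) + 1
--
--     colors = sorted(color_counts.keys(), key=lambda x: -color_counts[x])
--     if len(colors) < 3: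
--         return result
--
--     marker_color = colors[2]
--     target_color = colors[1]
--
--     parent = list(range(rows * cols))
--
--     def find(i):
--         while parent[i] != i:
--             i = parent[i]
--         return i
--
--     def union(i, j):
--         ri = find(i)
--         rj = find(j)
--         if ri < rj:
--             parent[rj] = ri
--         elif rj < ri:
--             parent[ri] = rj
--
--     for r in range(rows):
--         for c in range(cols):
--             if grid[r][c] == marker_color:
--                 if r + 1 < rows and grid[r + 1][c] == marker_color:
--                     union(r * cols + c, (r + 1) * cols + c)
--                 if c + 1 < cols and grid[r][c + 1] == marker_color:
--                     union(r * cols + c, r * cols + c + 1)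
--
--     groups = {}
--     for r in range(rows):
--         for c in range(cols):
--             if grid[r][c] == marker_color:
--                 groups.setdefault(find(r * cols + c), []).append((r, c))
--
--     for cells in groups.values():
--         min_r = min(x[0] for x in cells)
--         max_r = max(x[0] for x in cells)
--         min_c = min(x[1] for x in cells)
--         max_c = max(x[1] for x in cells)
--         for r in range(min_r, max_r + 1):
--             for c in range(min_c, max_c + 1):
--                 if result[r][c] == target_color:
--                     result[r][c] = 0
--
--     return result
-- ===== Notes on version B (the rewrite author's own statement) =====
-- stated objective: alternative
-- what changed: A's recursive-style DFS flood fill (explicit stack, visited matrix, cells collected per start cell) is replaced by a union-find over flat cell indices: one pass unions each marker cell with its right/down marker neighbours (attach-to-smaller-root), a second pass groups marker cells by their DSU root to get the components and their bounding boxes; the colour counting, the <3 guard and the box fill stay as in A.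
import Mathlib
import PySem

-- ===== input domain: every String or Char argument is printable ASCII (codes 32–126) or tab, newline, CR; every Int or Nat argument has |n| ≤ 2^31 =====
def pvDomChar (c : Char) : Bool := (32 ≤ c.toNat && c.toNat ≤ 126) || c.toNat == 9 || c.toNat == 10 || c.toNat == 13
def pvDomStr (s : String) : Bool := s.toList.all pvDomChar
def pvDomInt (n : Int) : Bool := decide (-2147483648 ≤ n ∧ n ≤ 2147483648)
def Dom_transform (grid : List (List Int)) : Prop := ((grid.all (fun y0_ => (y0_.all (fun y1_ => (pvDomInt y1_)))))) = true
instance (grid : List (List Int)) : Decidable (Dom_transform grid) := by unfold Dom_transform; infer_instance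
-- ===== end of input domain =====

-- B replaces A's DFS flood fill (explicit stack, visited matrix, per-component cell collection)
-- by a union-find over flat cell indices: one pass unions each marker cell with its right/down
-- marker neighbours (attach-to-smaller-root), a second pass groups marker cells by DSU root;
-- colour counting, the <3 guard and the box fill stay as in A. Same return value; neither
-- program mutates its argument (each fills a fresh copy).

-- ----- shared subscript helpers: transliteration of m[i][j] reads / writes -----
def mget {α : Type} (m : List (List α)) (i j : Int) (d : α) : α :=
  PySem.List.pyGetD (PySem.List.pyGetD m i []) j d
def mset {α : Type} (m : List (List α)) (i j : Int) (v : α) : List (List α) :=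
  PySem.List.pySetD m i (PySem.List.pySetD (PySem.List.pyGetD m i []) j v)

-- ===== PORT A =====
-- flood_fill: explicit stack, bounds/visited checks at pop, cells collected in visit order.
-- stack is stored top-first (Python appends at the end and pops the last element);
-- fuel only makes the recursion total — transform passes enough for it never to run out.
def floodA (g : List (List Int)) (rows cols marker : Int) :
    Nat → List (List Bool) → List (Int × Int) → List (Int × Int) →
    List (List Bool) × List (Int × Int)
  | 0, viz, cells, _ => (viz, cells)
  | _ + 1, viz, cells, [] => (viz, cells)
  | fuel + 1, viz, cells, (cr, cc) :: rest =>
    if cr < 0 ∨ rows ≤ cr ∨ cc < 0 ∨ cols ≤ cc then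
      floodA g rows cols marker fuel viz cells rest
    else if mget viz cr cc false = true ∨ mget g cr cc 0 ≠ marker then
      floodA g rows cols marker fuel viz cells rest
    else
      floodA g rows cols marker fuel (mset viz cr cc true) (cells ++ [(cr, cc)])
        ((cr, cc + 1) :: (cr, cc - 1) :: (cr + 1, cc) :: (cr - 1, cc) :: rest)

def transform (grid : List (List Int)) : List (List Int) :=
  let rows : Int := grid.length
  let cols : Int := (PySem.List.pyGetD grid 0 []).length
  let result := grid    -- copy.deepcopy(grid): value-identical
  let colorCounts : PySem.Dict Int Int :=
    (PySem.List.pyRange 0 rows 1).foldl (fun d r =>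
      (PySem.List.pyRange 0 cols 1).foldl (fun d c =>
        d.insert (mget grid r c 0) (d.getD (mget grid r c 0) 0 + 1)) d) PySem.Dict.empty
  let colors := PySem.List.sorted colorCounts.keys (fun x => -(colorCounts.getD x 0)) false
  if colors.length < 3 then result else
  let marker := PySem.List.pyGetD colors 2 0
  let target := PySem.List.pyGetD colors 1 0
  let visited : List (List Bool) := List.replicate rows.toNat (List.replicate cols.toNat false)
  let st := (PySem.List.pyRange 0 rows 1).foldl (fun st r =>
      (PySem.List.pyRange 0 cols 1).foldl (fun st c =>
        if mget grid r c 0 = marker ∧ mget st.1 r c false = false then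
          let fc := floodA grid rows cols marker (4 * rows.toNat * cols.toNat + 2) st.1 [] [(r, c)]
          if fc.2 ≠ [] then
            (fc.1, st.2 ++ [(((PySem.List.min? (fc.2.map Prod.fst) (fun y => y)).getD 0,
                              (PySem.List.max? (fc.2.map Prod.fst) (fun y => y)).getD 0,
                              (PySem.List.min? (fc.2.map Prod.snd) (fun y => y)).getD 0,
                              (PySem.List.max? (fc.2.map Prod.snd) (fun y => y)).getD 0) :
                              Int × Int × Int × Int)])
          else (fc.1, st.2)
        else st) st)
      ((visited, []) : List (List Bool) × List (Int × Int × Int × Int))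
  st.2.foldl (fun res box =>
    (PySem.List.pyRange box.1 (box.2.1 + 1) 1).foldl (fun res r =>
      (PySem.List.pyRange box.2.2.1 (box.2.2.2 + 1) 1).foldl (fun res c =>
        if mget res r c 0 = target then mset res r c 0 else res) res) res) result

-- ===== PORT B =====
-- union-find over flat indices r*cols+c; find follows parent links until a fixed point,
-- union attaches the larger root below the smaller.  fuel only makes find total — the
-- parent array always satisfies parent[i] ≤ i, so n+1 steps are always enough.
def pget (par : List Int) (i : Int) : Int := PySem.List.pyGetD par i 0

def findB : Nat → List Int → Int → Int
  | 0, _, i => i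
  | fuel + 1, par, i => if pget par i = i then i else findB fuel par (pget par i)

def unionB (fuel : Nat) (par : List Int) (i j : Int) : List Int :=
  let ri := findB fuel par i
  let rj := findB fuel par j
  if ri < rj then PySem.List.pySetD par rj ri
  else if rj < ri then PySem.List.pySetD par ri rj
  else par

def transform_alt (grid : List (List Int)) : List (List Int) :=
  let rows : Int := grid.length
  let cols : Int := (PySem.List.pyGetD grid 0 []).length
  let result := grid    -- [list(row) for row in grid]: value-identical copy
  let colorCounts : PySem.Dict Int Int :=
    (PySem.List.pyRange 0 rows 1).foldl (fun d r =>
      (PySem.List.pyRange 0 cols 1).foldl (fun d c =>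
        d.insert (mget grid r c 0) (d.getD (mget grid r c 0) 0 + 1)) d) PySem.Dict.empty
  let colors := PySem.List.sorted colorCounts.keys (fun x => -(colorCounts.getD x 0)) false
  if colors.length < 3 then result else
  let marker := PySem.List.pyGetD colors 2 0
  let target := PySem.List.pyGetD colors 1 0
  let n : Nat := (rows * cols).toNat
  let par := (PySem.List.pyRange 0 rows 1).foldl (fun par r =>
      (PySem.List.pyRange 0 cols 1).foldl (fun par c =>
        if mget grid r c 0 = marker then
          let par := if r + 1 < rows ∧ mget grid (r + 1) c 0 = marker
                     then unionB (n + 1) par (r * cols + c) ((r + 1) * cols + c) else par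
          if c + 1 < cols ∧ mget grid r (c + 1) 0 = marker
          then unionB (n + 1) par (r * cols + c) (r * cols + c + 1) else par
        else par) par)
      (PySem.List.pyRange 0 (rows * cols) 1)
  let groups : PySem.Dict Int (List (Int × Int)) :=
    (PySem.List.pyRange 0 rows 1).foldl (fun g r =>
      (PySem.List.pyRange 0 cols 1).foldl (fun g c =>
        if mget grid r c 0 = marker then
          g.insert (findB (n + 1) par (r * cols + c))
            (g.getD (findB (n + 1) par (r * cols + c)) [] ++ [(r, c)])
        else g) g) PySem.Dict.empty
  groups.values.foldl (fun res cells =>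
    let minR := (PySem.List.min? (cells.map Prod.fst) (fun y => y)).getD 0
    let maxR := (PySem.List.max? (cells.map Prod.fst) (fun y => y)).getD 0
    let minC := (PySem.List.min? (cells.map Prod.snd) (fun y => y)).getD 0
    let maxC := (PySem.List.max? (cells.map Prod.snd) (fun y => y)).getD 0
    (PySem.List.pyRange minR (maxR + 1) 1).foldl (fun res r =>
      (PySem.List.pyRange minC (maxC + 1) 1).foldl (fun res c =>
        if mget res r c 0 = target then mset res r c 0 else res) res) res) result

-- ===== PRECONDITION & SPEC =====
-- Pre_ excludes exactly the inputs on which A raises IndexError: the empty grid (grid[0]),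
-- and grids with a row shorter than the first row (grid[r][c] in the counting loop).
def Pre_transform (grid : List (List Int)) : Prop :=
  grid ≠ [] ∧ ∀ row ∈ grid, (grid.headD []).length ≤ row.length
instance (grid : List (List Int)) : Decidable (Pre_transform grid) := by
  unfold Pre_transform; infer_instance
def pvWitness_transform : List (List Int) := [[1, 2], [3, 1]]

def Spec_transform (grid : List (List Int)) (out : List (List Int)) : Prop := out = transform_alt grid
instance (grid : List (List Int)) (out : List (List Int)) : Decidable (Spec_transform grid out) := by
  unfold Spec_transform; infer_instance

-- ===== CLAIM (what is proved, stated in full; the proofs are below) =====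
def Claim_equal_transform : Prop :=
  ∀ (grid : List (List Int)), Dom_transform grid → Pre_transform grid → Spec_transform grid (transform grid)

-- ===== LEMMAS AND PROOFS =====

-- ----- positions, the marker-cell adjacency graph, reachability -----
abbrev Gd (g : List (List Int)) (R C m : Int) (p : Int × Int) : Prop :=
  0 ≤ p.1 ∧ p.1 < R ∧ 0 ≤ p.2 ∧ p.2 < C ∧ mget g p.1 p.2 0 = m

def Adj (p q : Int × Int) : Prop :=
  (q.1 = p.1 - 1 ∧ q.2 = p.2) ∨ (q.1 = p.1 + 1 ∧ q.2 = p.2) ∨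
  (q.1 = p.1 ∧ q.2 = p.2 - 1) ∨ (q.1 = p.1 ∧ q.2 = p.2 + 1)

def Stp (g : List (List Int)) (R C m : Int) (p q : Int × Int) : Prop :=
  Gd g R C m p ∧ Gd g R C m q ∧ Adj p q

def Reach (g : List (List Int)) (R C m : Int) (s q : Int × Int) : Prop :=
  Relation.ReflTransGen (Stp g R C m) s q

theorem adj_symm {p q : Int × Int} (h : Adj p q) : Adj q p := by
  unfold Adj at *; omega

theorem stp_symm {g : List (List Int)} {R C m : Int} {p q : Int × Int}
    (h : Stp g R C m p q) : Stp g R C m q p :=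
  ⟨h.2.1, h.1, adj_symm h.2.2⟩

theorem reach_symm {g : List (List Int)} {R C m : Int} {s q : Int × Int}
    (h : Reach g R C m s q) : Reach g R C m q s := by
  induction h with
  | refl => exact Relation.ReflTransGen.refl
  | tail _ h2 ih => exact Relation.ReflTransGen.head (stp_symm h2) ih

theorem reach_head {g : List (List Int)} {R C m : Int} {s e q : Int × Int}
    (h1 : Stp g R C m s e) (h2 : Reach g R C m e q) : Reach g R C m s q :=
  Relation.ReflTransGen.head h1 h2

theorem reach_good {g : List (List Int)} {R C m : Int} {s q : Int × Int}
    (hs : Gd g R C m s) (h : Reach g R C m s q) : Gd g R C m q := by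
  induction h with
  | refl => exact hs
  | tail _ h2 _ => exact h2.2.1

theorem reach_subset_closed {g : List (List Int)} {R C m : Int} {S : (Int × Int) → Prop}
    {s q : Int × Int} (hs : S s)
    (hc : ∀ p q', S p → Stp g R C m p q' → S q') (h : Reach g R C m s q) : S q := by
  induction h with
  | refl => exact hs
  | tail _ h2 ih => exact hc _ _ ih h2

-- ----- all in-bounds cells, and the "uncovered cells" counter used for fuel adequacy -----
def allCells (R C : Int) : List (Int × Int) :=
  (PySem.List.pyRange 0 R 1) ×ˢ (PySem.List.pyRange 0 C 1)

theorem mem_allCells {R C : Int} {p : Int × Int} :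
    p ∈ allCells R C ↔ 0 ≤ p.1 ∧ p.1 < R ∧ 0 ≤ p.2 ∧ p.2 < C := by
  cases p with
  | mk a b =>
    simp only [allCells, List.mem_product, PySem.List.mem_pyRange_one]
    omega

theorem nodup_allCells (R C : Int) : (allCells R C).Nodup :=
  List.Nodup.product (PySem.List.nodup_pyRange_one 0 R) (PySem.List.nodup_pyRange_one 0 C)

theorem length_allCells (R C : Int) : (allCells R C).length = R.toNat * C.toNat := by
  simp only [allCells, List.length_product, PySem.List.length_pyRange_one, Int.sub_zero]

def uncov (l : List (Int × Int)) (cov : (Int × Int) → Prop) [DecidablePred cov] : Nat :=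
  l.countP (fun p => !decide (cov p))

theorem uncov_flip {cov cov' : (Int × Int) → Prop} [DecidablePred cov] [DecidablePred cov']
    {x : Int × Int} :
    ∀ {l : List (Int × Int)}, l.Nodup → x ∈ l → ¬ cov x → cov' x →
      (∀ y ∈ l, y ≠ x → (cov' y ↔ cov y)) → uncov l cov' + 1 = uncov l cov := by
  intro l
  induction l with
  | nil => intro _ hx; cases hx
  | cons a t ih =>
    intro hn hx hold hnew hrest
    have hna := List.nodup_cons.1 hn
    simp only [uncov, List.countP_cons]
    rcases List.mem_cons.1 hx with heq | hxt
    · have hax : a = x := heq.symm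
      subst hax
      have ht : List.countP (fun p => !decide (cov' p)) t
          = List.countP (fun p => !decide (cov p)) t := by
        apply List.countP_congr
        intro y hy
        have hyx : y ≠ a := fun h => hna.1 (h ▸ hy)
        simp [hrest y (List.mem_cons_of_mem _ hy) hyx]
      simp [ht, hold, hnew]
    · have hax : a ≠ x := fun h => hna.1 (h ▸ hxt)
      have hih := ih hna.2 hxt hold hnew (fun y hy hyx => hrest y (List.mem_cons_of_mem _ hy) hyx)
      simp only [uncov] at hih
      by_cases hca : cov a
      · simp [hca, (hrest a (List.mem_cons_self) hax).2 hca, hih]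
      · have hca' : ¬ cov' a := fun h => hca ((hrest a (List.mem_cons_self) hax).1 h)
        simp [hca, hca']
        omega

theorem uncov_le (l : List (Int × Int)) (cov : (Int × Int) → Prop) [DecidablePred cov] :
    uncov l cov ≤ l.length := List.countP_le_length

-- ----- matrix subscript facts (nonnegative indices; mset is transliterated m[i][j]=v) -----
theorem mget_eq_getD {α : Type} (mm : List (List α)) (i j : Int) (d : α)
    (hi : 0 ≤ i) (hj : 0 ≤ j) : mget mm i j d = (mm.getD i.toNat []).getD j.toNat d := by
  unfold mget
  obtain ⟨n, rfl⟩ := Int.eq_ofNat_of_zero_le hi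
  obtain ⟨k, rfl⟩ := Int.eq_ofNat_of_zero_le hj
  simp [PySem.List.pyGetD_natCast]

theorem mset_eq_set {α : Type} (mm : List (List α)) (r c : Int) (v : α) (hr : 0 ≤ r) (hc : 0 ≤ c) :
    mset mm r c v = mm.set r.toNat ((mm.getD r.toNat []).set c.toNat v) := by
  unfold mset
  obtain ⟨n, rfl⟩ := Int.eq_ofNat_of_zero_le hr
  obtain ⟨k, rfl⟩ := Int.eq_ofNat_of_zero_le hc
  simp [PySem.List.pySetD_natCast, PySem.List.pyGetD_natCast]

theorem length_mset {α : Type} (mm : List (List α)) (r c : Int) (v : α) :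
    (mset mm r c v).length = mm.length := PySem.List.length_pySetD _ _ _

theorem getD_set_self {α : Type} (l : List α) (n : Nat) (a d : α) (h : n < l.length) :
    (l.set n a).getD n d = a := by
  rw [List.getD_eq_getElem?_getD, List.getElem?_set, if_pos rfl, if_pos h]; rfl

theorem getD_set_ne {α : Type} (l : List α) (n k : Nat) (a d : α) (h : n ≠ k) :
    (l.set n a).getD k d = l.getD k d := by
  rw [List.getD_eq_getElem?_getD, List.getElem?_set, if_neg h, ← List.getD_eq_getElem?_getD]

theorem mget_mset {α : Type} (mm : List (List α)) (r c i j : Int) (v d : α)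
    (hr : 0 ≤ r) (hc : 0 ≤ c) (hrl : r.toNat < mm.length)
    (hcl : c.toNat < (mm.getD r.toNat []).length) (hi : 0 ≤ i) (hj : 0 ≤ j) :
    mget (mset mm r c v) i j d = if i = r ∧ j = c then v else mget mm i j d := by
  rw [mset_eq_set mm r c v hr hc, mget_eq_getD _ i j d hi hj, mget_eq_getD mm i j d hi hj]
  by_cases hir : i = r
  · subst hir
    rw [getD_set_self mm i.toNat _ [] hrl]
    by_cases hjc : j = c
    · subst hjc
      rw [getD_set_self _ _ _ _ hcl]
      simp
    · rw [getD_set_ne _ _ _ _ _ (by omega : c.toNat ≠ j.toNat)]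
      rw [if_neg (by tauto)]
  · rw [getD_set_ne _ _ _ _ _ (by omega : r.toNat ≠ i.toNat)]
    rw [if_neg (by tauto)]

-- ----- the visited matrix of port A, abstractly -----
def VDim (R C : Int) (viz : List (List Bool)) : Prop :=
  viz.length = R.toNat ∧ ∀ row ∈ viz, row.length = C.toNat

abbrev VMem (viz : List (List Bool)) (p : Int × Int) : Prop := mget viz p.1 p.2 false = true

theorem vdim_mset {R C : Int} {viz : List (List Bool)} (h : VDim R C viz) (r c : Int) (v : Bool)
    (hr : 0 ≤ r) (hrR : r < R) (hc : 0 ≤ c) : VDim R C (mset viz r c v) := by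
  refine ⟨by rw [length_mset]; exact h.1, ?_⟩
  intro row hrow
  rw [mset_eq_set viz r c v hr hc] at hrow
  rcases List.mem_or_eq_of_mem_set hrow with hmem | heq
  · exact h.2 row hmem
  · subst heq
    have hlt : r.toNat < viz.length := by rw [h.1]; omega
    rw [List.length_set]
    exact h.2 _ (List.getD_eq_getElem viz [] hlt ▸ List.getElem_mem hlt)

theorem vmem_mset {R C : Int} {viz : List (List Bool)} (h : VDim R C viz) {r c : Int}
    (hr : 0 ≤ r) (hrR : r < R) (hc : 0 ≤ c) (hcC : c < C) (p : Int × Int)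
    (hp1 : 0 ≤ p.1) (hp2 : 0 ≤ p.2) :
    (VMem (mset viz r c true) p ↔ (p = (r, c) ∨ VMem viz p)) := by
  have hlt : r.toNat < viz.length := by rw [h.1]; omega
  have hrowlen : c.toNat < (viz.getD r.toNat []).length := by
    rw [h.2 _ (List.getD_eq_getElem viz [] hlt ▸ List.getElem_mem hlt)]
    omega
  unfold VMem
  rw [mget_mset viz r c p.1 p.2 true false hr hc hlt hrowlen hp1 hp2]
  constructor
  · intro hh
    by_cases hcase : p.1 = r ∧ p.2 = c
    · exact Or.inl (Prod.ext_iff.2 hcase)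
    · rw [if_neg hcase] at hh
      exact Or.inr hh
  · rintro (rfl | hv)
    · simp
    · by_cases hcase : p.1 = r ∧ p.2 = c
      · rw [if_pos hcase]
      · rw [if_neg hcase]; exact hv

-- an out-of-bounds or fresh cell is not in the all-false initial matrix
theorem pyGetD_mem_or_default {α : Type} (xs : List α) (i : Int) (d : α) :
    PySem.List.pyGetD xs i d ∈ xs ∨ PySem.List.pyGetD xs i d = d := by
  by_cases h : PySem.Raise.InRange xs.length i
  · exact Or.inl (PySem.List.pyGetD_mem xs d h)
  · exact Or.inr (PySem.List.pyGetD_of_none xs i d ((PySem.List.pyGet?_eq_none_iff xs i).2 h))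

theorem vmem_replicate (R C : Int) (p : Int × Int) :
    ¬ VMem (List.replicate R.toNat (List.replicate C.toNat false)) p := by
  intro h
  unfold VMem mget at h
  rcases pyGetD_mem_or_default (List.replicate R.toNat (List.replicate C.toNat false)) p.1 [] with hm | hd
  · rw [List.eq_of_mem_replicate hm] at h
    rcases pyGetD_mem_or_default (List.replicate C.toNat false) p.2 false with hm2 | hd2
    · rw [List.eq_of_mem_replicate hm2] at h; cases h
    · rw [hd2] at h; cases h
  · rw [hd] at h
    rcases pyGetD_mem_or_default ([] : List Bool) p.2 false with hm2 | hd2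
    · cases hm2
    · rw [hd2] at h; cases h
-- ----- what port A's flood fill computes -----
theorem floodA_spec (g : List (List Int)) (R C m : Int) :
    ∀ (fuel : Nat) (viz : List (List Bool)) (cells stack : List (Int × Int)),
    VDim R C viz →
    4 * uncov (allCells R C) (VMem viz) + stack.length < fuel →
    (∀ p q, VMem viz p → Stp g R C m p q → VMem viz q ∨ q ∈ stack) →
    VDim R C (floodA g R C m fuel viz cells stack).1 ∧
    (∃ extra,
      (floodA g R C m fuel viz cells stack).2 = cells ++ extra ∧
      extra.Nodup ∧
      (∀ p, 0 ≤ p.1 → 0 ≤ p.2 →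
        (VMem (floodA g R C m fuel viz cells stack).1 p ↔ (VMem viz p ∨ p ∈ extra))) ∧
      (∀ p ∈ extra, Gd g R C m p ∧ ¬ VMem viz p ∧
        ∃ e ∈ stack, Gd g R C m e ∧ Reach g R C m e p)) ∧
    (∀ p q, VMem (floodA g R C m fuel viz cells stack).1 p → Stp g R C m p q →
        VMem (floodA g R C m fuel viz cells stack).1 q) ∧
    (∀ e ∈ stack, Gd g R C m e → VMem (floodA g R C m fuel viz cells stack).1 e) := by
  intro fuel
  induction fuel with
  | zero => intro viz cells stack _ hfuel _; omega
  | succ fuel IH =>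
    intro viz cells stack hdim hfuel hstk
    cases stack with
    | nil =>
      simp only [floodA]
      refine ⟨hdim, ⟨[], by simp, List.nodup_nil, by simp, by simp⟩, ?_, by simp⟩
      intro p q hp hst
      rcases hstk p q hp hst with h | h
      · exact h
      · cases h
    | cons hd rest =>
      obtain ⟨cr, cc⟩ := hd
      simp only [floodA]
      split_ifs with h1 h2
      · -- out of bounds: skip
        have hngd : ¬ Gd g R C m (cr, cc) := by
          intro hg
          obtain ⟨a1, a2, a3, a4, _⟩ := hg
          dsimp only at a1 a2 a3 a4
          rcases h1 with h | h | h | h <;> omega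
        have hstk' : ∀ p q, VMem viz p → Stp g R C m p q → VMem viz q ∨ q ∈ rest := by
          intro p q hp hst
          rcases hstk p q hp hst with h | h
          · exact Or.inl h
          · rcases List.mem_cons.1 h with rfl | h
            · exact absurd hst.2.1 hngd
            · exact Or.inr h
        obtain ⟨ihdim, ⟨extra, he1, he2, he3, he4⟩, ihcl, ihstk⟩ :=
          IH viz cells rest hdim (by simp only [List.length_cons] at hfuel; omega) hstk'
        refine ⟨ihdim, ⟨extra, he1, he2, he3, ?_⟩, ihcl, ?_⟩
        · intro p hp
          obtain ⟨hg, hnv, e, hmem, hge, hre⟩ := he4 p hp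
          exact ⟨hg, hnv, e, List.mem_cons_of_mem _ hmem, hge, hre⟩
        · intro e he hge
          rcases List.mem_cons.1 he with rfl | he
          · exact absurd hge hngd
          · exact ihstk e he hge
      · -- already visited, or not the marker color: skip
        have hstk' : ∀ p q, VMem viz p → Stp g R C m p q → VMem viz q ∨ q ∈ rest := by
          intro p q hp hst
          rcases hstk p q hp hst with h | h
          · exact Or.inl h
          · rcases List.mem_cons.1 h with rfl | h
            · rcases h2 with h2 | h2
              · exact Or.inl h2
              · exact absurd hst.2.1.2.2.2.2 h2
            · exact Or.inr h
        obtain ⟨ihdim, ⟨extra, he1, he2, he3, he4⟩, ihcl, ihstk⟩ :=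
          IH viz cells rest hdim (by simp only [List.length_cons] at hfuel; omega) hstk'
        refine ⟨ihdim, ⟨extra, he1, he2, he3, ?_⟩, ihcl, ?_⟩
        · intro p hp
          obtain ⟨hg, hnv, e, hmem, hge, hre⟩ := he4 p hp
          exact ⟨hg, hnv, e, List.mem_cons_of_mem _ hmem, hge, hre⟩
        · intro e he hge
          rcases List.mem_cons.1 he with rfl | he
          · rcases h2 with h2 | h2
            · exact (he3 _ hge.1 hge.2.2.1).2 (Or.inl h2)
            · exact absurd hge.2.2.2.2 h2
          · exact ihstk e he hge
      · -- fresh marker cell: mark it, push its four neighbours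
        push Not at h1 h2
        obtain ⟨hb1, hb2, hb3, hb4⟩ := h1
        obtain ⟨hnv', hmk⟩ := h2
        have hb1' : 0 ≤ cr := by omega
        have hb3' : 0 ≤ cc := by omega
        have hnv : ¬ VMem viz (cr, cc) := fun hv => hnv' hv
        have hgd : Gd g R C m (cr, cc) := ⟨hb1', hb2, hb3', hb4, hmk⟩
        have hdim' : VDim R C (mset viz cr cc true) := vdim_mset hdim cr cc true hb1' hb2 hb3'
        have hmem' : ∀ p, 0 ≤ p.1 → 0 ≤ p.2 →
            (VMem (mset viz cr cc true) p ↔ (p = (cr, cc) ∨ VMem viz p)) :=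
          fun p hp1 hp2 => vmem_mset hdim hb1' hb2 hb3' hb4 p hp1 hp2
        have hucnt : uncov (allCells R C) (VMem (mset viz cr cc true)) + 1
            = uncov (allCells R C) (VMem viz) := by
          apply uncov_flip (nodup_allCells R C) (mem_allCells.2 ⟨hb1', hb2, hb3', hb4⟩) hnv
            ((hmem' (cr, cc) hb1' hb3').2 (Or.inl rfl))
          intro y hy hyx
          have hym := mem_allCells.1 hy
          rw [hmem' y hym.1 hym.2.2.1]
          simp [hyx]
        have hstk' : ∀ p q, VMem (mset viz cr cc true) p → Stp g R C m p q →
            VMem (mset viz cr cc true) q ∨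
              q ∈ ((cr, cc + 1) :: (cr, cc - 1) :: (cr + 1, cc) :: (cr - 1, cc) :: rest) := by
          intro p q hp hst
          have hq := hst.2.1
          rcases (hmem' p hst.1.1 hst.1.2.2.1).1 hp with rfl | hpv
          · right
            rcases hst.2.2 with ⟨e1, e2⟩ | ⟨e1, e2⟩ | ⟨e1, e2⟩ | ⟨e1, e2⟩
            · have hqe : q = (cr - 1, cc) := Prod.ext_iff.2 ⟨e1, e2⟩
              simp [hqe]
            · have hqe : q = (cr + 1, cc) := Prod.ext_iff.2 ⟨e1, e2⟩
              simp [hqe]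
            · have hqe : q = (cr, cc - 1) := Prod.ext_iff.2 ⟨e1, e2⟩
              simp [hqe]
            · have hqe : q = (cr, cc + 1) := Prod.ext_iff.2 ⟨e1, e2⟩
              simp [hqe]
          · rcases hstk p q hpv hst with h | h
            · exact Or.inl ((hmem' q hq.1 hq.2.2.1).2 (Or.inr h))
            · rcases List.mem_cons.1 h with rfl | h
              · exact Or.inl ((hmem' _ hb1' hb3').2 (Or.inl rfl))
              · right
                simp [h]
        obtain ⟨ihdim, ⟨extra, he1, he2, he3, he4⟩, ihcl, ihstk⟩ :=
          IH (mset viz cr cc true) (cells ++ [(cr, cc)]) _ hdim'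
            (by simp only [List.length_cons] at hfuel ⊢; omega) hstk'
        refine ⟨ihdim, ⟨(cr, cc) :: extra, ?_, ?_, ?_, ?_⟩, ihcl, ?_⟩
        · rw [he1, List.append_assoc]
          rfl
        · refine List.nodup_cons.2 ⟨?_, he2⟩
          intro hmem
          exact (he4 _ hmem).2.1 ((hmem' (cr, cc) hb1' hb3').2 (Or.inl rfl))
        · intro p hp1 hp2
          rw [he3 p hp1 hp2, hmem' p hp1 hp2]
          constructor
          · rintro ((rfl | h) | h)
            · exact Or.inr List.mem_cons_self
            · exact Or.inl h
            · exact Or.inr (List.mem_cons_of_mem _ h)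
          · rintro (h | h)
            · exact Or.inl (Or.inr h)
            · rcases List.mem_cons.1 h with rfl | h
              · exact Or.inl (Or.inl rfl)
              · exact Or.inr h
        · intro p hp
          rcases List.mem_cons.1 hp with rfl | hp
          · exact ⟨hgd, hnv, (cr, cc), List.mem_cons_self, hgd, Relation.ReflTransGen.refl⟩
          · obtain ⟨hg, hnvp, e, hmeme, hge, hre⟩ := he4 p hp
            have hnvp0 : ¬ VMem viz p := fun hv =>
              hnvp ((hmem' p hg.1 hg.2.2.1).2 (Or.inr hv))
            refine ⟨hg, hnvp0, ?_⟩
            have hcase : e = (cr, cc + 1) ∨ e = (cr, cc - 1) ∨ e = (cr + 1, cc) ∨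
                e = (cr - 1, cc) ∨ e ∈ rest := by simpa using hmeme
            rcases hcase with rfl | rfl | rfl | rfl | he'
            · exact ⟨(cr, cc), List.mem_cons_self, hgd,
                reach_head ⟨hgd, hge, Or.inr (Or.inr (Or.inr ⟨rfl, rfl⟩))⟩ hre⟩
            · exact ⟨(cr, cc), List.mem_cons_self, hgd,
                reach_head ⟨hgd, hge, Or.inr (Or.inr (Or.inl ⟨rfl, rfl⟩))⟩ hre⟩
            · exact ⟨(cr, cc), List.mem_cons_self, hgd,
                reach_head ⟨hgd, hge, Or.inr (Or.inl ⟨rfl, rfl⟩)⟩ hre⟩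
            · exact ⟨(cr, cc), List.mem_cons_self, hgd,
                reach_head ⟨hgd, hge, Or.inl ⟨rfl, rfl⟩⟩ hre⟩
            · exact ⟨e, List.mem_cons_of_mem _ he', hge, hre⟩
        · intro e he hge
          rcases List.mem_cons.1 he with rfl | he
          · exact (he3 _ hb1' hb3').2 (Or.inl ((hmem' (cr, cc) hb1' hb3').2 (Or.inl rfl)))
          · exact ihstk e (by simp [he]) hge

-- ----- flat indices and the scan order -----
def flatI (C : Int) (p : Int × Int) : Int := p.1 * C + p.2

theorem flat_lt_scan {C : Int} {p q : Int × Int} (hp2 : 0 ≤ p.2) (hpC : p.2 < C) (hq2 : 0 ≤ q.2)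
    (h : p.1 < q.1 ∨ (p.1 = q.1 ∧ p.2 < q.2)) : flatI C p < flatI C q := by
  unfold flatI
  rcases h with h | ⟨h1, h2⟩
  · have hm : (p.1 + 1) * C ≤ q.1 * C := mul_le_mul_of_nonneg_right (by omega) (by omega)
    nlinarith
  · rw [h1]; omega

theorem flat_inj {C : Int} {p q : Int × Int} (hp2 : 0 ≤ p.2) (hpC : p.2 < C)
    (hq2 : 0 ≤ q.2) (hqC : q.2 < C) (h : flatI C p = flatI C q) : p = q := by
  rcases lt_trichotomy p.1 q.1 with h1 | h1 | h1
  · exact absurd h (by have := flat_lt_scan hp2 hpC hq2 (Or.inl h1); omega)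
  · rcases lt_trichotomy p.2 q.2 with h2 | h2 | h2
    · exact absurd h (by have := flat_lt_scan hp2 hpC hq2 (Or.inr ⟨h1, h2⟩); omega)
    · exact Prod.ext_iff.2 ⟨h1, h2⟩
    · exact absurd h (by have := flat_lt_scan hq2 hqC hp2 (Or.inr ⟨h1.symm, h2⟩); omega)
  · exact absurd h (by have := flat_lt_scan hq2 hqC hp2 (Or.inl h1); omega)

theorem flat_bounds {R C : Int} {p : Int × Int} (h : 0 ≤ p.1 ∧ p.1 < R ∧ 0 ≤ p.2 ∧ p.2 < C) :
    0 ≤ flatI C p ∧ flatI C p < R * C := by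
  unfold flatI
  constructor
  · have := mul_nonneg h.1 (by omega : (0:Int) ≤ C); omega
  · have hm : (p.1 + 1) * C ≤ R * C := mul_le_mul_of_nonneg_right (by omega) (by omega)
    nlinarith

theorem pairwise_product {C : Int} {l1 l2 : List Int} (h1 : l1.Pairwise (· < ·))
    (h2 : l2.Pairwise (· < ·)) (hmem : ∀ b ∈ l2, 0 ≤ b ∧ b < C) :
    (l1 ×ˢ l2).Pairwise (fun p q => flatI C p < flatI C q) := by
  induction l1 with
  | nil => simp
  | cons a t ih =>
    rw [List.product_cons, List.pairwise_append]
    refine ⟨List.pairwise_map.2 ?_, ih (List.pairwise_cons.1 h1).2, ?_⟩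
    · refine List.Pairwise.imp_of_mem ?_ h2
      intro b1 b2 hb1 hb2 hlt
      exact flat_lt_scan (hmem b1 hb1).1 (hmem b1 hb1).2 (hmem b2 hb2).1 (Or.inr ⟨rfl, hlt⟩)
    · intro x hx y hy
      obtain ⟨b, hb, rfl⟩ := List.mem_map.1 hx
      obtain ⟨y1, y2⟩ := y
      have hy' := List.mem_product.1 hy
      exact flat_lt_scan (hmem b hb).1 (hmem b hb).2 (hmem y2 hy'.2).1
        (Or.inl ((List.pairwise_cons.1 h1).1 y1 hy'.1))

theorem pairwise_allCells (R C : Int) :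
    (allCells R C).Pairwise (fun p q => flatI C p < flatI C q) := by
  unfold allCells
  exact pairwise_product (PySem.List.pairwise_lt_pyRange_one 0 R)
    (PySem.List.pairwise_lt_pyRange_one 0 C)
    (fun b hb => by have := PySem.List.mem_pyRange_one.1 hb; omega)

-- fold over two nested ranges is a fold over the product list of cells
theorem foldl_foldl_prod {σ : Type} (f : σ → (Int × Int) → σ) (l1 l2 : List Int) (s : σ) :
    l1.foldl (fun s r => l2.foldl (fun s c => f s (r, c)) s) s = (l1 ×ˢ l2).foldl f s := by
  induction l1 generalizing s with
  | nil => rfl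
  | cons a t ih =>
    simp only [List.foldl_cons, List.product_cons, List.foldl_append, List.foldl_map]
    exact ih _

-- scan-prefix characterisation: the processed cells are exactly those with smaller flat index
theorem scan_prefix {R C : Int} {P rest : List (Int × Int)} {s : Int × Int}
    (h : P ++ s :: rest = allCells R C) :
    s ∈ allCells R C ∧ (∀ q ∈ P, flatI C q < flatI C s) ∧
    (∀ q ∈ allCells R C, flatI C q < flatI C s → q ∈ P) := by
  have hpw := pairwise_allCells R C
  rw [← h] at hpw
  refine ⟨by rw [← h]; simp, ?_, ?_⟩
  · intro q hq
    exact (List.pairwise_append.1 hpw).2.2 q hq s List.mem_cons_self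
  · intro q hq hlt
    rw [← h] at hq
    rcases List.mem_append.1 hq with h1 | h1
    · exact h1
    · rcases List.mem_cons.1 h1 with rfl | h1
      · omega
      · exfalso
        have := (List.pairwise_cons.1 (List.pairwise_append.1 hpw).2.1).1 q h1
        omega

-- ----- the connected component of a cell, computed by A's flood fill from a fresh matrix -----
def fuelA (R C : Int) : Nat := 4 * R.toNat * C.toNat + 2
def vizInit (R C : Int) : List (List Bool) := List.replicate R.toNat (List.replicate C.toNat false)

def classList (g : List (List Int)) (R C m : Int) (l : Int × Int) : List (Int × Int) :=
  (floodA g R C m (fuelA R C) (vizInit R C) [] [l]).2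

theorem vdim_vizInit (R C : Int) : VDim R C (vizInit R C) := by
  refine ⟨List.length_replicate, ?_⟩
  intro row hrow
  rw [List.eq_of_mem_replicate hrow]
  exact List.length_replicate

theorem uncov_vizInit (R C : Int) :
    uncov (allCells R C) (VMem (vizInit R C)) = R.toNat * C.toNat := by
  rw [← length_allCells R C]
  unfold uncov
  apply List.countP_eq_length.2
  intro p _
  simp [vmem_replicate R C p, vizInit]

theorem classList_spec (g : List (List Int)) (R C m : Int) (l : Int × Int)
    (hl : Gd g R C m l) :
    (∀ q, q ∈ classList g R C m l ↔ Reach g R C m l q) ∧ (classList g R C m l).Nodup := by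
  obtain ⟨hdim', ⟨extra, he1, he2, he3, he4⟩, hcl, hstk⟩ :=
    floodA_spec g R C m (fuelA R C) (vizInit R C) [] [l] (vdim_vizInit R C)
      (by rw [uncov_vizInit]; unfold fuelA; simp only [List.length_cons, List.length_nil]; rw [Nat.mul_assoc]; omega)
      (fun p q hp _ => absurd hp (vmem_replicate R C p))
  have hclass : classList g R C m l = extra := by
    unfold classList; rw [he1]; rfl
  rw [hclass]
  refine ⟨?_, he2⟩
  intro q
  constructor
  · intro hq
    obtain ⟨_, _, e, he, _, hre⟩ := he4 q hq
    rcases List.mem_cons.1 he with rfl | hf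
    · exact hre
    · cases hf
  · intro hre
    have hq : Gd g R C m q := reach_good hl hre
    have hv : VMem (floodA g R C m (fuelA R C) (vizInit R C) [] [l]).1 q :=
      reach_subset_closed (hstk l List.mem_cons_self hl) hcl hre
    rcases (he3 q hq.1 hq.2.2.1).1 hv with h | h
    · exact absurd h (vmem_replicate R C q)
    · exact h

theorem mem_classList {g : List (List Int)} {R C m : Int} {l : Int × Int}
    (hl : Gd g R C m l) (q : Int × Int) :
    q ∈ classList g R C m l ↔ Reach g R C m l q :=
  (classList_spec g R C m l hl).1 q

theorem classList_ne_nil {g : List (List Int)} {R C m : Int} {l : Int × Int}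
    (hl : Gd g R C m l) : classList g R C m l ≠ [] := by
  intro h
  have := (mem_classList hl l).2 Relation.ReflTransGen.refl
  rw [h] at this
  cases this

-- ----- min / max over a component only depend on its member set -----
theorem minval_congr {l1 l2 : List Int} (h1 : l1 ≠ []) (hm : ∀ x, x ∈ l1 ↔ x ∈ l2) :
    (PySem.List.min? l1 (fun y => y)).getD 0 = (PySem.List.min? l2 (fun y => y)).getD 0 := by
  obtain ⟨x1, hx1⟩ := List.exists_mem_of_ne_nil l1 h1
  have h2 : l2 ≠ [] := fun he => by rw [he] at hm; exact (List.not_mem_nil ((hm x1).1 hx1)).elim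
  obtain ⟨m1, hm1⟩ : ∃ m, PySem.List.min? l1 (fun y => y) = some m := by
    cases he : PySem.List.min? l1 (fun y => y)
    · exact absurd ((PySem.List.min?_eq_none_iff _ _).1 he) h1
    · exact ⟨_, rfl⟩
  obtain ⟨m2, hm2⟩ : ∃ m, PySem.List.min? l2 (fun y => y) = some m := by
    cases he : PySem.List.min? l2 (fun y => y)
    · exact absurd ((PySem.List.min?_eq_none_iff _ _).1 he) h2
    · exact ⟨_, rfl⟩
  rw [hm1, hm2]
  have e1 := PySem.List.min?_mem hm1
  have e2 := PySem.List.min?_mem hm2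
  have le1 := PySem.List.min?_isMin hm1 m2 ((hm m2).2 e2)
  have le2 := PySem.List.min?_isMin hm2 m1 ((hm m1).1 e1)
  simp only [Option.getD_some]
  omega

theorem maxval_congr {l1 l2 : List Int} (h1 : l1 ≠ []) (hm : ∀ x, x ∈ l1 ↔ x ∈ l2) :
    (PySem.List.max? l1 (fun y => y)).getD 0 = (PySem.List.max? l2 (fun y => y)).getD 0 := by
  obtain ⟨x1, hx1⟩ := List.exists_mem_of_ne_nil l1 h1
  have h2 : l2 ≠ [] := fun he => by rw [he] at hm; exact (List.not_mem_nil ((hm x1).1 hx1)).elim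
  obtain ⟨m1, hm1⟩ : ∃ m, PySem.List.max? l1 (fun y => y) = some m := by
    cases he : PySem.List.max? l1 (fun y => y)
    · exact absurd ((PySem.List.max?_eq_none_iff _ _).1 he) h1
    · exact ⟨_, rfl⟩
  obtain ⟨m2, hm2⟩ : ∃ m, PySem.List.max? l2 (fun y => y) = some m := by
    cases he : PySem.List.max? l2 (fun y => y)
    · exact absurd ((PySem.List.max?_eq_none_iff _ _).1 he) h2
    · exact ⟨_, rfl⟩
  rw [hm1, hm2]
  have e1 := PySem.List.max?_mem hm1
  have e2 := PySem.List.max?_mem hm2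
  have le1 := PySem.List.max?_isMax hm1 m2 ((hm m2).2 e2)
  have le2 := PySem.List.max?_isMax hm2 m1 ((hm m1).1 e1)
  simp only [Option.getD_some]
  omega

def boxTuple (l : List (Int × Int)) : Int × Int × Int × Int :=
  ((PySem.List.min? (l.map Prod.fst) (fun y => y)).getD 0,
   (PySem.List.max? (l.map Prod.fst) (fun y => y)).getD 0,
   (PySem.List.min? (l.map Prod.snd) (fun y => y)).getD 0,
   (PySem.List.max? (l.map Prod.snd) (fun y => y)).getD 0)

theorem boxTuple_congr {l1 l2 : List (Int × Int)} (h1 : l1 ≠ [])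
    (hm : ∀ q, q ∈ l1 ↔ q ∈ l2) : boxTuple l1 = boxTuple l2 := by
  have hf : ∀ x, x ∈ l1.map Prod.fst ↔ x ∈ l2.map Prod.fst := by
    intro x
    simp only [List.mem_map]
    exact ⟨fun ⟨q, hq, he⟩ => ⟨q, (hm q).1 hq, he⟩, fun ⟨q, hq, he⟩ => ⟨q, (hm q).2 hq, he⟩⟩
  have hs : ∀ x, x ∈ l1.map Prod.snd ↔ x ∈ l2.map Prod.snd := by
    intro x
    simp only [List.mem_map]
    exact ⟨fun ⟨q, hq, he⟩ => ⟨q, (hm q).1 hq, he⟩, fun ⟨q, hq, he⟩ => ⟨q, (hm q).2 hq, he⟩⟩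
  have hne : l1.map Prod.fst ≠ [] := by
    intro he; exact h1 (List.map_eq_nil_iff.1 he)
  have hne2 : l1.map Prod.snd ≠ [] := by
    intro he; exact h1 (List.map_eq_nil_iff.1 he)
  unfold boxTuple
  rw [minval_congr hne hf, maxval_congr hne hf, minval_congr hne2 hs, maxval_congr hne2 hs]

def classBox (g : List (List Int)) (R C m : Int) (l : Int × Int) : Int × Int × Int × Int :=
  boxTuple (classList g R C m l)

def isLeaderB (g : List (List Int)) (R C m : Int) (l : Int × Int) : Bool :=
  decide (Gd g R C m l) && (classList g R C m l).all (fun q => decide (flatI C l ≤ flatI C q))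

def leadersL (g : List (List Int)) (R C m : Int) : List (Int × Int) :=
  (allCells R C).filter (isLeaderB g R C m)

def scanClass (g : List (List Int)) (R C m : Int) (l : Int × Int) : List (Int × Int) :=
  (allCells R C).filter (fun q => decide (q ∈ classList g R C m l))

-- ----- port A's component scan, one cell at a time -----
def Astep (g : List (List Int)) (R C m : Int)
    (st : List (List Bool) × List (Int × Int × Int × Int)) (p : Int × Int) :
    List (List Bool) × List (Int × Int × Int × Int) :=
  if mget g p.1 p.2 0 = m ∧ mget st.1 p.1 p.2 false = false then
    let fc := floodA g R C m (4 * R.toNat * C.toNat + 2) st.1 [] [(p.1, p.2)]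
    if fc.2 ≠ [] then (fc.1, st.2 ++ [boxTuple fc.2]) else (fc.1, st.2)
  else st

theorem A_go (g : List (List Int)) (R C m : Int) :
    ∀ (rest P : List (Int × Int)) (viz : List (List Bool)) (comps : List (Int × Int × Int × Int)),
    P ++ rest = allCells R C →
    VDim R C viz →
    (∀ p, 0 ≤ p.1 → 0 ≤ p.2 → (VMem viz p ↔ ∃ s ∈ P, Gd g R C m s ∧ Reach g R C m s p)) →
    comps = (P.filter (isLeaderB g R C m)).map (classBox g R C m) →
    (rest.foldl (Astep g R C m) (viz, comps)).2
      = ((allCells R C).filter (isLeaderB g R C m)).map (classBox g R C m) := by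
  intro rest
  induction rest with
  | nil =>
    intro P viz comps hP _ _ hcomps
    rw [List.append_nil] at hP
    simpa [hP] using hcomps
  | cons s rest ih =>
    intro P viz comps hP hdim hinv hcomps
    obtain ⟨hsAll, hbefore, hcover⟩ := scan_prefix hP
    have hs := mem_allCells.1 hsAll
    simp only [List.foldl_cons]
    have hP' : (P ++ [s]) ++ rest = allCells R C := by
      rw [List.append_assoc]; exact hP
    by_cases hgd : mget g s.1 s.2 0 = m
    · have hGd : Gd g R C m s := ⟨hs.1, hs.2.1, hs.2.2.1, hs.2.2.2, hgd⟩
      by_cases hviz : VMem viz s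
      · -- already visited: skip, s is not a leader
        obtain ⟨t, htP, htG, htR⟩ := (hinv s hs.1 hs.2.2.1).1 hviz
        have hstep : Astep g R C m (viz, comps) s = (viz, comps) := by
          unfold Astep
          rw [if_neg]
          intro hcond
          have hviz' : mget viz s.1 s.2 false = true := hviz
          have h2 : mget viz s.1 s.2 false = false := hcond.2
          rw [h2] at hviz'
          exact Bool.noConfusion hviz'
        rw [hstep]
        apply ih (P ++ [s]) viz comps hP' hdim
        · intro p hp1 hp2
          rw [hinv p hp1 hp2]
          constructor
          · rintro ⟨t', ht', hg', hr'⟩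
            exact ⟨t', List.mem_append_left _ ht', hg', hr'⟩
          · rintro ⟨t', ht', hg', hr'⟩
            rcases List.mem_append.1 ht' with h1 | h1
            · exact ⟨t', h1, hg', hr'⟩
            · rcases List.mem_singleton.1 h1 with rfl
              exact ⟨t, htP, htG, Relation.ReflTransGen.trans htR hr'⟩
        · have hlead : isLeaderB g R C m s = false := by
            unfold isLeaderB
            rw [Bool.and_eq_false_iff]
            right
            rw [List.all_eq_false]
            refine ⟨t, (mem_classList hGd t).2 (reach_symm htR), ?_⟩
            have := hbefore t htP
            simp only [decide_eq_true_eq]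
            omega
          rw [hcomps, List.filter_append, List.filter_singleton, hlead]
          simp
      · -- fresh marker cell: A floods its whole component here; s is a leader
        obtain ⟨hdim', ⟨extra, he1, he2, he3, he4⟩, hcl', hstk'⟩ :=
          floodA_spec g R C m (4 * R.toNat * C.toNat + 2) viz [] [s] hdim
            (by
              have h1 := uncov_le (allCells R C) (VMem viz)
              rw [length_allCells] at h1
              simp only [List.length_cons, List.length_nil]
              rw [Nat.mul_assoc]
              omega)
            (by
              intro p q hp hst
              left
              obtain ⟨t, htP, htG, htR⟩ := (hinv p hst.1.1 hst.1.2.2.1).1 hp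
              exact (hinv q hst.2.1.1 hst.2.1.2.2.1).2
                ⟨t, htP, htG, Relation.ReflTransGen.tail htR hst⟩)
        have hfc2 : (floodA g R C m (4 * R.toNat * C.toNat + 2) viz [] [s]).2 = extra := by
          rw [he1]; rfl
        have hsex : s ∈ extra := by
          have hv := hstk' s List.mem_cons_self hGd
          rcases (he3 s hs.1 hs.2.2.1).1 hv with h | h
          · exact absurd h hviz
          · exact h
        have hexiff : ∀ q, q ∈ extra ↔ q ∈ classList g R C m s := by
          intro q
          constructor
          · intro hq
            obtain ⟨hg', _, e, he, _, hre⟩ := he4 q hq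
            rcases List.mem_cons.1 he with rfl | hf
            · exact (mem_classList hGd q).2 hre
            · cases hf
          · intro hq
            have hre := (mem_classList hGd q).1 hq
            have hgq : Gd g R C m q := reach_good hGd hre
            have hv : VMem (floodA g R C m (4 * R.toNat * C.toNat + 2) viz [] [s]).1 q :=
              reach_subset_closed (hstk' s List.mem_cons_self hGd) hcl' hre
            rcases (he3 q hgq.1 hgq.2.2.1).1 hv with h | h
            · exfalso
              obtain ⟨t, htP, htG, htR⟩ := (hinv q hgq.1 hgq.2.2.1).1 h
              exact hviz ((hinv s hs.1 hs.2.2.1).2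
                ⟨t, htP, htG, Relation.ReflTransGen.trans htR (reach_symm hre)⟩)
            · exact h
        have hexne : extra ≠ [] := fun he => by rw [he] at hsex; cases hsex
        have hlead : isLeaderB g R C m s = true := by
          unfold isLeaderB
          rw [Bool.and_eq_true]
          refine ⟨decide_eq_true hGd, List.all_eq_true.2 ?_⟩
          intro q hq
          have hre := (mem_classList hGd q).1 hq
          have hgq : Gd g R C m q := reach_good hGd hre
          simp only [decide_eq_true_eq]
          by_contra hflat
          have hqP : q ∈ P := hcover q (mem_allCells.2 ⟨hgq.1, hgq.2.1, hgq.2.2.1, hgq.2.2.2.1⟩)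
            (by omega)
          exact hviz ((hinv s hs.1 hs.2.2.1).2 ⟨q, hqP, hgq, reach_symm hre⟩)
        have hstep : Astep g R C m (viz, comps) s =
            ((floodA g R C m (4 * R.toNat * C.toNat + 2) viz [] [s]).1,
              comps ++ [classBox g R C m s]) := by
          unfold Astep
          rw [if_pos ⟨hgd, by
            cases hb : mget viz s.1 s.2 false
            · rfl
            · exact absurd hb hviz⟩]
          simp only []
          rw [if_pos (by rw [hfc2]; exact hexne)]
          have hbox : boxTuple (floodA g R C m (4 * R.toNat * C.toNat + 2) viz [] [s]).2
              = classBox g R C m s := by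
            rw [hfc2]
            exact boxTuple_congr hexne hexiff
          rw [hbox]
        rw [hstep]
        apply ih (P ++ [s]) _ _ hP' hdim'
        · intro p hp1 hp2
          rw [he3 p hp1 hp2, hinv p hp1 hp2]
          constructor
          · rintro (⟨t, htP, htG, htR⟩ | hex)
            · exact ⟨t, List.mem_append_left _ htP, htG, htR⟩
            · exact ⟨s, List.mem_append_right _ (List.mem_singleton.2 rfl), hGd,
                (mem_classList hGd p).1 ((hexiff p).1 hex)⟩
          · rintro ⟨t, ht, htG, htR⟩
            rcases List.mem_append.1 ht with h1 | h1
            · exact Or.inl ⟨t, h1, htG, htR⟩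
            · rcases List.mem_singleton.1 h1 with rfl
              exact Or.inr ((hexiff p).2 ((mem_classList hGd p).2 htR))
        · rw [hcomps, List.filter_append, List.filter_singleton, hlead]
          simp
    · -- not a marker cell: nothing happens
      have hstep : Astep g R C m (viz, comps) s = (viz, comps) := by
        unfold Astep
        rw [if_neg (fun hcond => hgd hcond.1)]
      rw [hstep]
      apply ih (P ++ [s]) viz comps hP' hdim
      · intro p hp1 hp2
        rw [hinv p hp1 hp2]
        constructor
        · rintro ⟨t, htP, htG, htR⟩
          exact ⟨t, List.mem_append_left _ htP, htG, htR⟩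
        · rintro ⟨t, ht, htG, htR⟩
          rcases List.mem_append.1 ht with h1 | h1
          · exact ⟨t, h1, htG, htR⟩
          · rcases List.mem_singleton.1 h1 with rfl
            exact absurd htG.2.2.2.2 hgd
      · have hlead : isLeaderB g R C m s = false := by
          unfold isLeaderB
          rw [Bool.and_eq_false_iff]
          left
          exact decide_eq_false (fun hg => hgd hg.2.2.2.2)
        rw [hcomps, List.filter_append, List.filter_singleton, hlead]
        simp

theorem A_fold_eq (g : List (List Int)) (R C m : Int) :
    ((allCells R C).foldl (Astep g R C m) (vizInit R C, [])).2
      = (leadersL g R C m).map (classBox g R C m) := by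
  unfold leadersL
  exact A_go g R C m (allCells R C) [] (vizInit R C) [] rfl (vdim_vizInit R C)
    (fun p _ _ => ⟨fun h => absurd h (vmem_replicate R C p), fun ⟨t, ht, _, _⟩ => absurd ht (List.not_mem_nil)⟩)
    rfl

-- ----- port B's union-find: parent-array invariant, roots, and what union does -----
def PInv (n : Nat) (par : List Int) : Prop :=
  par.length = n ∧ ∀ i : Int, 0 ≤ i → i < (n : Int) → 0 ≤ pget par i ∧ pget par i ≤ i

def rootD (n : Nat) (par : List Int) (i : Int) : Int := findB (n + 1) par i

theorem findB_go {n : Nat} {par : List Int} (hI : PInv n par) :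
    ∀ (k : Nat) (i : Int), 0 ≤ i → i < (n : Int) → i.toNat ≤ k →
      ∀ fuel : Nat, i.toNat < fuel →
      pget par (findB fuel par i) = findB fuel par i ∧
      0 ≤ findB fuel par i ∧ findB fuel par i ≤ i ∧
      findB fuel par i = findB (i.toNat + 1) par i := by
  intro k
  induction k with
  | zero =>
    intro i h0 hn hk fuel hf
    obtain ⟨f, rfl⟩ : ∃ f, fuel = f + 1 := ⟨fuel - 1, by omega⟩
    have hi0 : i = 0 := by omega
    subst hi0
    obtain ⟨hj0, hj1⟩ := hI.2 0 (by omega) hn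
    have hr : pget par 0 = 0 := by omega
    simp [findB, hr]
  | succ k ih =>
    intro i h0 hn hk fuel hf
    obtain ⟨f, rfl⟩ : ∃ f, fuel = f + 1 := ⟨fuel - 1, by omega⟩
    by_cases hr : pget par i = i
    · have e1 : findB (f + 1) par i = i := by simp [findB, hr]
      have e2 : findB (i.toNat + 1) par i = i := by simp [findB, hr]
      rw [e1, e2]
      exact ⟨hr, h0, le_refl i, rfl⟩
    · obtain ⟨hj0, hj1⟩ := hI.2 i h0 hn
      have hji : pget par i < i := lt_of_le_of_ne hj1 hr
      have hjn : pget par i < (n : Int) := by omega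
      have hjk : (pget par i).toNat ≤ k := by omega
      have e1 : findB (f + 1) par i = findB f par (pget par i) := by simp [findB, hr]
      have hfj : (pget par i).toNat < f := by omega
      obtain ⟨a1, a2, a3, a4⟩ := ih (pget par i) hj0 hjn hjk f hfj
      have e2 : findB (i.toNat + 1) par i = findB i.toNat par (pget par i) := by
        have : i.toNat + 1 = (i.toNat - 1 + 1) + 1 := by omega
        simp [findB, hr]
      have hfi : (pget par i).toNat < i.toNat := by omega
      obtain ⟨b1, b2, b3, b4⟩ := ih (pget par i) hj0 hjn hjk i.toNat hfi
      refine ⟨by rw [e1]; exact a1, by rw [e1]; omega, by rw [e1]; omega, ?_⟩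
      rw [e1, e2, a4, b4]

theorem rootD_props {n : Nat} {par : List Int} (hI : PInv n par) {i : Int}
    (h0 : 0 ≤ i) (hn : i < (n : Int)) :
    pget par (rootD n par i) = rootD n par i ∧ 0 ≤ rootD n par i ∧ rootD n par i ≤ i := by
  obtain ⟨a1, a2, a3, _⟩ := findB_go hI i.toNat i h0 hn le_rfl (n + 1) (by omega)
  exact ⟨a1, a2, a3⟩

theorem rootD_of_root {n : Nat} {par : List Int} {r : Int} (hr : pget par r = r) :
    rootD n par r = r := by
  simp [rootD, findB, hr]

theorem rootD_step {n : Nat} {par : List Int} (hI : PInv n par) {i : Int}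
    (h0 : 0 ≤ i) (hn : i < (n : Int)) (hr : pget par i ≠ i) :
    rootD n par i = rootD n par (pget par i) := by
  obtain ⟨hj0, hj1⟩ := hI.2 i h0 hn
  have hji : pget par i < i := lt_of_le_of_ne hj1 hr
  have hjn : pget par i < (n : Int) := by omega
  have e1 : rootD n par i = findB n par (pget par i) := by
    simp [rootD, findB, hr]
  obtain ⟨_, _, _, a4⟩ := findB_go hI (pget par i).toNat (pget par i) hj0 hjn le_rfl n (by omega)
  obtain ⟨_, _, _, b4⟩ := findB_go hI (pget par i).toNat (pget par i) hj0 hjn le_rfl (n + 1) (by omega)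
  rw [e1, a4]
  exact b4.symm

theorem pget_pySetD (par : List Int) (b a i : Int) (hb : 0 ≤ b) (hbl : b < (par.length : Int))
    (hi : 0 ≤ i) (hil : i < (par.length : Int)) :
    pget (PySem.List.pySetD par b a) i = if i = b then a else pget par i := by
  unfold pget
  obtain ⟨bn, rfl⟩ := Int.eq_ofNat_of_zero_le hb
  obtain ⟨iN, rfl⟩ := Int.eq_ofNat_of_zero_le hi
  rw [PySem.List.pySetD_natCast, PySem.List.pyGetD_natCast, PySem.List.pyGetD_natCast]
  by_cases h : (iN : Int) = (bn : Int)
  · have hnb : iN = bn := by omega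
    subst hnb
    rw [if_pos rfl, getD_set_self _ _ _ _ (by omega)]
  · rw [if_neg h, getD_set_ne _ _ _ _ _ (by omega)]

theorem root_set {n : Nat} {par : List Int} (hI : PInv n par) {a b : Int}
    (ha0 : 0 ≤ a) (han : a < (n : Int)) (hbn : b < (n : Int))
    (hra : pget par a = a) (hrb : pget par b = b) (hab : a < b) :
    PInv n (PySem.List.pySetD par b a) ∧
    ∀ i : Int, 0 ≤ i → i < (n : Int) →
      rootD n (PySem.List.pySetD par b a) i =
        if rootD n par i = b then a else rootD n par i := by
  have hb0 : 0 ≤ b := by omega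
  have hlen : (par.length : Int) = (n : Int) := by rw [hI.1]
  have hpg : ∀ i : Int, 0 ≤ i → i < (n : Int) →
      pget (PySem.List.pySetD par b a) i = if i = b then a else pget par i := by
    intro i h0 hn
    exact pget_pySetD par b a i hb0 (by omega) h0 (by omega)
  have hI' : PInv n (PySem.List.pySetD par b a) := by
    refine ⟨by rw [PySem.List.length_pySetD]; exact hI.1, ?_⟩
    intro i h0 hn
    rw [hpg i h0 hn]
    split_ifs with h
    · omega
    · exact hI.2 i h0 hn
  refine ⟨hI', ?_⟩
  suffices H : ∀ (k : Nat) (i : Int), 0 ≤ i → i < (n : Int) → i.toNat ≤ k →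
      rootD n (PySem.List.pySetD par b a) i =
        if rootD n par i = b then a else rootD n par i by
    intro i h0 hn
    exact H i.toNat i h0 hn le_rfl
  intro k
  induction k with
  | zero =>
    intro i h0 hn hk
    have hi0 : i = 0 := by omega
    subst hi0
    obtain ⟨hj0, hj1⟩ := hI.2 0 (by omega) hn
    have hr : pget par 0 = 0 := by omega
    have hib : (0 : Int) ≠ b := by omega
    have hr' : pget (PySem.List.pySetD par b a) 0 = 0 := by
      rw [hpg 0 (by omega) hn, if_neg hib]
      exact hr
    rw [rootD_of_root hr, rootD_of_root hr', if_neg hib]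
  | succ k ih =>
    intro i h0 hn hk
    by_cases hib : i = b
    · have hpgb : pget (PySem.List.pySetD par b a) i = a := by
        rw [hpg i h0 hn, if_pos hib]
      have hne : pget (PySem.List.pySetD par b a) i ≠ i := by
        rw [hpgb]; omega
      rw [rootD_step hI' h0 hn hne, hpgb]
      have hpga : pget (PySem.List.pySetD par b a) a = a := by
        rw [hpg a ha0 han, if_neg (by omega)]
        exact hra
      rw [rootD_of_root hpga, hib, rootD_of_root hrb, if_pos rfl]
    · have hpgi : pget (PySem.List.pySetD par b a) i = pget par i := by
        rw [hpg i h0 hn, if_neg hib]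
      by_cases hr : pget par i = i
      · rw [rootD_of_root (hpgi.trans hr), rootD_of_root hr, if_neg hib]
      · obtain ⟨hj0, hj1⟩ := hI.2 i h0 hn
        have hji : pget par i < i := lt_of_le_of_ne hj1 hr
        rw [rootD_step hI' h0 hn (by rw [hpgi]; exact hr), hpgi,
          rootD_step hI h0 hn hr]
        exact ih (pget par i) hj0 (by omega) (by omega)

theorem unionB_spec {n : Nat} {par : List Int} (hI : PInv n par) {i j : Int}
    (hi0 : 0 ≤ i) (hin : i < (n : Int)) (hj0 : 0 ≤ j) (hjn : j < (n : Int)) :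
    PInv n (unionB (n + 1) par i j) ∧
    ∀ x : Int, 0 ≤ x → x < (n : Int) →
      rootD n (unionB (n + 1) par i j) x =
        if rootD n par x = rootD n par i ∨ rootD n par x = rootD n par j
        then min (rootD n par i) (rootD n par j) else rootD n par x := by
  obtain ⟨fi, fi0, fii⟩ := rootD_props hI hi0 hin
  obtain ⟨fj, fj0, fjj⟩ := rootD_props hI hj0 hjn
  have hu : unionB (n + 1) par i j =
      if rootD n par i < rootD n par j
      then PySem.List.pySetD par (rootD n par j) (rootD n par i)
      else if rootD n par j < rootD n par i
      then PySem.List.pySetD par (rootD n par i) (rootD n par j)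
      else par := rfl
  rw [hu]
  split_ifs with h1 h2
  · obtain ⟨hI', hroot⟩ := root_set hI fi0 (by omega) (by omega) fi fj h1
    refine ⟨hI', ?_⟩
    intro x hx0 hxn
    rw [hroot x hx0 hxn]
    by_cases hxj : rootD n par x = rootD n par j
    · rw [if_pos hxj, if_pos (Or.inr hxj)]
      omega
    · rw [if_neg hxj]
      by_cases hxi : rootD n par x = rootD n par i
      · rw [if_pos (Or.inl hxi), hxi]
        omega
      · rw [if_neg (by tauto)]
  · obtain ⟨hI', hroot⟩ := root_set hI fj0 (by omega) (by omega) fj fi h2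
    refine ⟨hI', ?_⟩
    intro x hx0 hxn
    rw [hroot x hx0 hxn]
    by_cases hxi : rootD n par x = rootD n par i
    · rw [if_pos hxi, if_pos (Or.inl hxi)]
      omega
    · rw [if_neg hxi]
      by_cases hxj : rootD n par x = rootD n par j
      · rw [if_pos (Or.inr hxj), hxj]
        omega
      · rw [if_neg (by tauto)]
  · have heq : rootD n par i = rootD n par j := by omega
    refine ⟨hI, ?_⟩
    intro x hx0 hxn
    split_ifs with h
    · rcases h with h | h
      · rw [h, heq]
        omega
      · rw [h, heq]
        omega
    · rfl

-- ----- generated equivalence closure of an edge list -----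
theorem eqvgen_false {α : Type} {x y : α} (h : Relation.EqvGen (fun _ _ => False) x y) :
    x = y := by
  induction h with
  | rel _ _ h => exact h.elim
  | refl _ => rfl
  | symm _ _ _ ih => exact ih.symm
  | trans _ _ _ _ _ ih1 ih2 => exact ih1.trans ih2

theorem eqvgen_congr {α : Type} {R S : α → α → Prop} (h : ∀ a b, R a b ↔ S a b) {x y : α} :
    Relation.EqvGen R x y ↔ Relation.EqvGen S x y :=
  ⟨Relation.EqvGen.mono (fun a b hr => (h a b).1 hr),
   Relation.EqvGen.mono (fun a b hr => (h a b).2 hr)⟩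

theorem eqvgen_union_single {α : Type} {R : α → α → Prop} {a b : α} : ∀ {x y : α},
    Relation.EqvGen (fun u v => R u v ∨ (u = a ∧ v = b)) x y ↔
      (Relation.EqvGen R x y ∨
       (Relation.EqvGen R x a ∧ Relation.EqvGen R b y) ∨
       (Relation.EqvGen R x b ∧ Relation.EqvGen R a y)) := by
  intro x y
  constructor
  · intro h
    induction h with
    | rel u v h =>
      rcases h with h | ⟨rfl, rfl⟩
      · exact Or.inl (Relation.EqvGen.rel _ _ h)
      · exact Or.inr (Or.inl ⟨Relation.EqvGen.refl _, Relation.EqvGen.refl _⟩)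
    | refl u => exact Or.inl (Relation.EqvGen.refl u)
    | symm u v _ ih =>
      rcases ih with h | ⟨h1, h2⟩ | ⟨h1, h2⟩
      · exact Or.inl (Relation.EqvGen.symm _ _ h)
      · exact Or.inr (Or.inr ⟨Relation.EqvGen.symm _ _ h2, Relation.EqvGen.symm _ _ h1⟩)
      · exact Or.inr (Or.inl ⟨Relation.EqvGen.symm _ _ h2, Relation.EqvGen.symm _ _ h1⟩)
    | trans u v w _ _ ih1 ih2 =>
      rcases ih1 with h1 | ⟨h1, h1'⟩ | ⟨h1, h1'⟩ <;>
        rcases ih2 with h2 | ⟨h2, h2'⟩ | ⟨h2, h2'⟩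
      · exact Or.inl (Relation.EqvGen.trans _ _ _ h1 h2)
      · exact Or.inr (Or.inl ⟨Relation.EqvGen.trans _ _ _ h1 h2, h2'⟩)
      · exact Or.inr (Or.inr ⟨Relation.EqvGen.trans _ _ _ h1 h2, h2'⟩)
      · exact Or.inr (Or.inl ⟨h1, Relation.EqvGen.trans _ _ _ h1' h2⟩)
      · exact Or.inr (Or.inl ⟨h1, h2'⟩)
      · exact Or.inl (Relation.EqvGen.trans _ _ _ h1 h2')
      · exact Or.inr (Or.inr ⟨h1, Relation.EqvGen.trans _ _ _ h1' h2⟩)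
      · exact Or.inl (Relation.EqvGen.trans _ _ _ h1 h2')
      · have hab2 : Relation.EqvGen R a b := Relation.EqvGen.trans _ _ _ h1' h2
        exact Or.inr (Or.inl ⟨Relation.EqvGen.trans _ _ _ h1 (Relation.EqvGen.symm _ _ hab2),
          Relation.EqvGen.trans _ _ _ (Relation.EqvGen.symm _ _ hab2) h2'⟩)
  · intro h
    have lift : ∀ {u v : α}, Relation.EqvGen R u v →
        Relation.EqvGen (fun u v => R u v ∨ (u = a ∧ v = b)) u v :=
      fun h => Relation.EqvGen.mono (fun _ _ hr => Or.inl hr) h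
    have hab : Relation.EqvGen (fun u v => R u v ∨ (u = a ∧ v = b)) a b :=
      Relation.EqvGen.rel _ _ (Or.inr ⟨rfl, rfl⟩)
    rcases h with h | ⟨h1, h2⟩ | ⟨h1, h2⟩
    · exact lift h
    · exact Relation.EqvGen.trans _ _ _ (lift h1) (Relation.EqvGen.trans _ _ _ hab (lift h2))
    · exact Relation.EqvGen.trans _ _ _ (lift h1)
        (Relation.EqvGen.trans _ _ _ (Relation.EqvGen.symm _ _ hab) (lift h2))

-- ----- the processed right/down edges, and their closure vs 4-connectivity -----
def EdgeTo (g : List (List Int)) (R C m : Int) (p q : Int × Int) : Prop :=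
  Gd g R C m p ∧ Gd g R C m q ∧
    ((q.1 = p.1 + 1 ∧ q.2 = p.2) ∨ (q.1 = p.1 ∧ q.2 = p.2 + 1))

def EdgeIn (g : List (List Int)) (R C m : Int) (P : List (Int × Int)) (x y : Int) : Prop :=
  ∃ p q, p ∈ P ∧ EdgeTo g R C m p q ∧ x = flatI C p ∧ y = flatI C q

def RF (g : List (List Int)) (R C m : Int) (x y : Int) : Prop :=
  x = y ∨ ∃ p q, Gd g R C m p ∧ Gd g R C m q ∧ x = flatI C p ∧ y = flatI C q ∧ Reach g R C m p q

theorem stp_of_edgeTo {g : List (List Int)} {R C m : Int} {p q : Int × Int}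
    (h : EdgeTo g R C m p q) : Stp g R C m p q := by
  obtain ⟨h1, h2, h3⟩ := h
  refine ⟨h1, h2, ?_⟩
  unfold Adj
  rcases h3 with ⟨e1, e2⟩ | ⟨e1, e2⟩
  · exact Or.inr (Or.inl ⟨e1, e2⟩)
  · exact Or.inr (Or.inr (Or.inr ⟨e1, e2⟩))

theorem eqvgen_to_RF {g : List (List Int)} {R C m : Int} {P : List (Int × Int)} {x y : Int}
    (h : Relation.EqvGen (EdgeIn g R C m P) x y) : RF g R C m x y := by
  induction h with
  | rel u v h =>
    obtain ⟨p, q, _, he, rfl, rfl⟩ := h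
    exact Or.inr ⟨p, q, he.1, he.2.1, rfl, rfl,
      Relation.ReflTransGen.single (stp_of_edgeTo he)⟩
  | refl u => exact Or.inl rfl
  | symm u v _ ih =>
    rcases ih with h | ⟨p, q, h1, h2, h3, h4, h5⟩
    · exact Or.inl h.symm
    · exact Or.inr ⟨q, p, h2, h1, h4, h3, reach_symm h5⟩
  | trans u v w _ _ ih1 ih2 =>
    rcases ih1 with h1 | ⟨p, q, a1, a2, a3, a4, a5⟩
    · rw [h1]; exact ih2
    · rcases ih2 with h2 | ⟨p', q', b1, b2, b3, b4, b5⟩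
      · rw [← h2]; exact Or.inr ⟨p, q, a1, a2, a3, a4, a5⟩
      · have hqp : q = p' := flat_inj a2.2.2.1 a2.2.2.2.1 b1.2.2.1 b1.2.2.2.1 (a4.symm.trans b3)
        exact Or.inr ⟨p, q', a1, b2, a3, b4,
          Relation.ReflTransGen.trans a5 (hqp ▸ b5)⟩

theorem reach_to_eqvgen {g : List (List Int)} {R C m : Int} {P : List (Int × Int)}
    (hP : ∀ p, Gd g R C m p → p ∈ P) {p q : Int × Int} (h : Reach g R C m p q) :
    Relation.EqvGen (EdgeIn g R C m P) (flatI C p) (flatI C q) := by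
  induction h with
  | refl => exact Relation.EqvGen.refl _
  | @tail y z hr hst ih =>
    refine Relation.EqvGen.trans _ _ _ ih ?_
    obtain ⟨hgy, hgz, hadj⟩ := hst
    rcases hadj with ⟨e1, e2⟩ | ⟨e1, e2⟩ | ⟨e1, e2⟩ | ⟨e1, e2⟩
    · exact Relation.EqvGen.symm _ _ (Relation.EqvGen.rel _ _
        ⟨z, y, hP z hgz, ⟨hgz, hgy, Or.inl ⟨by omega, by omega⟩⟩, rfl, rfl⟩)
    · exact Relation.EqvGen.rel _ _
        ⟨y, z, hP y hgy, ⟨hgy, hgz, Or.inl ⟨e1, e2⟩⟩, rfl, rfl⟩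
    · exact Relation.EqvGen.symm _ _ (Relation.EqvGen.rel _ _
        ⟨z, y, hP z hgz, ⟨hgz, hgy, Or.inr ⟨by omega, by omega⟩⟩, rfl, rfl⟩)
    · exact Relation.EqvGen.rel _ _
        ⟨y, z, hP y hgy, ⟨hgy, hgz, Or.inr ⟨e1, e2⟩⟩, rfl, rfl⟩

-- ----- one union step preserves the root ↔ edge-closure correspondence -----
theorem rootiff_union {g : List (List Int)} {R C m : Int} {n : Nat} {par : List Int}
    {E : Int → Int → Prop}
    (hI : PInv n par)
    (hiff : ∀ p q, Gd g R C m p → Gd g R C m q →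
      (rootD n par (flatI C p) = rootD n par (flatI C q) ↔
        Relation.EqvGen E (flatI C p) (flatI C q)))
    {s t : Int × Int} (hgs : Gd g R C m s) (hgt : Gd g R C m t)
    (hn : (n : Int) = R * C) :
    PInv n (unionB (n + 1) par (flatI C s) (flatI C t)) ∧
    ∀ p q, Gd g R C m p → Gd g R C m q →
      (rootD n (unionB (n + 1) par (flatI C s) (flatI C t)) (flatI C p) =
          rootD n (unionB (n + 1) par (flatI C s) (flatI C t)) (flatI C q) ↔
        Relation.EqvGen (fun u v => E u v ∨ (u = flatI C s ∧ v = flatI C t))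
          (flatI C p) (flatI C q)) := by
  have hbs := flat_bounds (R := R) ⟨hgs.1, hgs.2.1, hgs.2.2.1, hgs.2.2.2.1⟩
  have hbt := flat_bounds (R := R) ⟨hgt.1, hgt.2.1, hgt.2.2.1, hgt.2.2.2.1⟩
  obtain ⟨hI', hroot⟩ := unionB_spec hI (i := flatI C s) (j := flatI C t)
    hbs.1 (by omega) hbt.1 (by omega)
  refine ⟨hI', ?_⟩
  intro p q hp hq
  have hbp := flat_bounds (R := R) ⟨hp.1, hp.2.1, hp.2.2.1, hp.2.2.2.1⟩
  have hbq := flat_bounds (R := R) ⟨hq.1, hq.2.1, hq.2.2.1, hq.2.2.2.1⟩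
  rw [hroot (flatI C p) hbp.1 (by omega), hroot (flatI C q) hbq.1 (by omega),
    eqvgen_union_single]
  by_cases hps : rootD n par (flatI C p) = rootD n par (flatI C s) ∨
      rootD n par (flatI C p) = rootD n par (flatI C t)
  · by_cases hqs : rootD n par (flatI C q) = rootD n par (flatI C s) ∨
        rootD n par (flatI C q) = rootD n par (flatI C t)
    · rw [if_pos hps, if_pos hqs]
      apply iff_of_true rfl
      rcases hps with hps | hps <;> rcases hqs with hqs | hqs
      · exact Or.inl (Relation.EqvGen.trans _ _ _ ((hiff p s hp hgs).1 hps)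
          (Relation.EqvGen.symm _ _ ((hiff q s hq hgs).1 hqs)))
      · exact Or.inr (Or.inl ⟨(hiff p s hp hgs).1 hps,
          Relation.EqvGen.symm _ _ ((hiff q t hq hgt).1 hqs)⟩)
      · exact Or.inr (Or.inr ⟨(hiff p t hp hgt).1 hps,
          Relation.EqvGen.symm _ _ ((hiff q s hq hgs).1 hqs)⟩)
      · exact Or.inl (Relation.EqvGen.trans _ _ _ ((hiff p t hp hgt).1 hps)
          (Relation.EqvGen.symm _ _ ((hiff q t hq hgt).1 hqs)))
    · rw [if_pos hps, if_neg hqs]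
      apply iff_of_false
      · rcases min_choice (rootD n par (flatI C s)) (rootD n par (flatI C t)) with hmin | hmin <;>
          rw [hmin] <;> tauto
      · rintro (h | ⟨h1, h2⟩ | ⟨h1, h2⟩)
        · rcases hps with hps | hps
          · exact hqs (Or.inl (((hiff p q hp hq).2 h).symm.trans hps))
          · exact hqs (Or.inr (((hiff p q hp hq).2 h).symm.trans hps))
        · exact hqs (Or.inr ((hiff q t hq hgt).2 (Relation.EqvGen.symm _ _ h2)))
        · exact hqs (Or.inl ((hiff q s hq hgs).2 (Relation.EqvGen.symm _ _ h2)))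
  · by_cases hqs : rootD n par (flatI C q) = rootD n par (flatI C s) ∨
        rootD n par (flatI C q) = rootD n par (flatI C t)
    · rw [if_neg hps, if_pos hqs]
      apply iff_of_false
      · rcases min_choice (rootD n par (flatI C s)) (rootD n par (flatI C t)) with hmin | hmin <;>
          rw [hmin] <;> tauto
      · rintro (h | ⟨h1, h2⟩ | ⟨h1, h2⟩)
        · rcases hqs with hqs | hqs
          · exact hps (Or.inl (((hiff p q hp hq).2 h).trans hqs))
          · exact hps (Or.inr (((hiff p q hp hq).2 h).trans hqs))
        · exact hps (Or.inl ((hiff p s hp hgs).2 h1))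
        · exact hps (Or.inr ((hiff p t hp hgt).2 h1))
    · rw [if_neg hps, if_neg hqs]
      rw [hiff p q hp hq]
      constructor
      · exact Or.inl
      · rintro (h | ⟨h1, h2⟩ | ⟨h1, h2⟩)
        · exact h
        · exact absurd (Or.inl ((hiff p s hp hgs).2 h1)) hps
        · exact absurd (Or.inr ((hiff p t hp hgt).2 h1)) hps

-- ----- the union pass of port B, one cell at a time -----
def Ustep (g : List (List Int)) (R C m : Int) (n : Nat) (par : List Int) (p : Int × Int) :
    List Int :=
  if mget g p.1 p.2 0 = m then
    let par2 := if p.1 + 1 < R ∧ mget g (p.1 + 1) p.2 0 = m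
                then unionB (n + 1) par (p.1 * C + p.2) ((p.1 + 1) * C + p.2) else par
    if p.2 + 1 < C ∧ mget g p.1 (p.2 + 1) 0 = m
    then unionB (n + 1) par2 (p.1 * C + p.2) (p.1 * C + p.2 + 1) else par2
  else par

theorem edgeIn_snoc_iff {g : List (List Int)} {R C m : Int} {P : List (Int × Int)}
    {s : Int × Int} (x y : Int) :
    EdgeIn g R C m (P ++ [s]) x y ↔
      (EdgeIn g R C m P x y ∨
        ∃ q, EdgeTo g R C m s q ∧ x = flatI C s ∧ y = flatI C q) := by
  constructor
  · rintro ⟨p, q, hp, he, hx, hy⟩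
    rcases List.mem_append.1 hp with h | h
    · exact Or.inl ⟨p, q, h, he, hx, hy⟩
    · rcases List.mem_singleton.1 h with rfl
      exact Or.inr ⟨q, he, hx, hy⟩
  · rintro (⟨p, q, hp, he, hx, hy⟩ | ⟨q, he, hx, hy⟩)
    · exact ⟨p, q, List.mem_append_left _ hp, he, hx, hy⟩
    · exact ⟨s, q, List.mem_append_right _ (List.mem_singleton.2 rfl), he, hx, hy⟩

theorem edgeTo_s_iff {g : List (List Int)} {R C m : Int} {s : Int × Int}
    (hGd : Gd g R C m s) (q : Int × Int) :
    EdgeTo g R C m s q ↔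
      ((q = (s.1 + 1, s.2) ∧ (s.1 + 1 < R ∧ mget g (s.1 + 1) s.2 0 = m)) ∨
       (q = (s.1, s.2 + 1) ∧ (s.2 + 1 < C ∧ mget g s.1 (s.2 + 1) 0 = m))) := by
  constructor
  · rintro ⟨_, hq, hdir⟩
    rcases hdir with ⟨e1, e2⟩ | ⟨e1, e2⟩
    · left
      have hqe : q = (s.1 + 1, s.2) := Prod.ext_iff.2 ⟨e1, e2⟩
      refine ⟨hqe, ?_, ?_⟩
      · rw [hqe] at hq; exact hq.2.1
      · rw [hqe] at hq; exact hq.2.2.2.2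
    · right
      have hqe : q = (s.1, s.2 + 1) := Prod.ext_iff.2 ⟨e1, e2⟩
      refine ⟨hqe, ?_, ?_⟩
      · rw [hqe] at hq; exact hq.2.2.2.1
      · rw [hqe] at hq; exact hq.2.2.2.2
  · rintro (⟨rfl, h1, h2⟩ | ⟨rfl, h1, h2⟩)
    · exact ⟨hGd, ⟨by omega, h1, hGd.2.2.1, hGd.2.2.2.1, h2⟩, Or.inl ⟨rfl, rfl⟩⟩
    · exact ⟨hGd, ⟨hGd.1, hGd.2.1, by omega, h1, h2⟩, Or.inr ⟨rfl, rfl⟩⟩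

theorem edgeIn_snoc_not_gd {g : List (List Int)} {R C m : Int} {P : List (Int × Int)}
    {s : Int × Int} (hngd : ¬ Gd g R C m s) (x y : Int) :
    EdgeIn g R C m (P ++ [s]) x y ↔ EdgeIn g R C m P x y := by
  rw [edgeIn_snoc_iff]
  constructor
  · rintro (h | ⟨q, he, _, _⟩)
    · exact h
    · exact absurd he.1 hngd
  · exact Or.inl

theorem U_go (g : List (List Int)) (R C m : Int) (n : Nat) (hn : (n : Int) = R * C) :
    ∀ (rest P : List (Int × Int)) (par : List Int),
    P ++ rest = allCells R C →
    PInv n par →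
    (∀ p q, Gd g R C m p → Gd g R C m q →
      (rootD n par (flatI C p) = rootD n par (flatI C q) ↔
        Relation.EqvGen (EdgeIn g R C m P) (flatI C p) (flatI C q))) →
    PInv n (rest.foldl (Ustep g R C m n) par) ∧
    (∀ p q, Gd g R C m p → Gd g R C m q →
      (rootD n (rest.foldl (Ustep g R C m n) par) (flatI C p) =
          rootD n (rest.foldl (Ustep g R C m n) par) (flatI C q) ↔
        Relation.EqvGen (EdgeIn g R C m (allCells R C)) (flatI C p) (flatI C q))) := by
  intro rest
  induction rest with
  | nil =>
    intro P par hP hI hiff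
    rw [List.append_nil] at hP
    subst hP
    exact ⟨hI, hiff⟩
  | cons s rest ih =>
    intro P par hP hI hiff
    have hP' : (P ++ [s]) ++ rest = allCells R C := by
      rw [List.append_assoc]; exact hP
    simp only [List.foldl_cons]
    by_cases hm : mget g s.1 s.2 0 = m
    · have hsAll : s ∈ allCells R C := by
        rw [← hP]
        exact List.mem_append_right _ List.mem_cons_self
      have hs := mem_allCells.1 hsAll
      have hGd : Gd g R C m s := ⟨hs.1, hs.2.1, hs.2.2.1, hs.2.2.2, hm⟩
      have e2 : s.1 * C + s.2 + 1 = flatI C (s.1, s.2 + 1) := by unfold flatI; ring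
      by_cases hc1 : s.1 + 1 < R ∧ mget g (s.1 + 1) s.2 0 = m
      · have hGd1 : Gd g R C m (s.1 + 1, s.2) := ⟨by omega, hc1.1, hs.2.2.1, hs.2.2.2, hc1.2⟩
        obtain ⟨hI2, hiff2⟩ := rootiff_union hI hiff hGd hGd1 hn
        by_cases hc2 : s.2 + 1 < C ∧ mget g s.1 (s.2 + 1) 0 = m
        · have hGd2 : Gd g R C m (s.1, s.2 + 1) := ⟨hs.1, hs.2.1, by omega, hc2.1, hc2.2⟩
          obtain ⟨hI3, hiff3⟩ := rootiff_union hI2 hiff2 hGd hGd2 hn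
          have hstep : Ustep g R C m n par s =
              unionB (n + 1) (unionB (n + 1) par (flatI C s) (flatI C (s.1 + 1, s.2)))
                (flatI C s) (flatI C (s.1, s.2 + 1)) := by
            simp only [Ustep, if_pos hm, if_pos hc1, if_pos hc2]
            rw [e2]
            rfl
          rw [hstep]
          apply ih (P ++ [s]) _ hP' hI3
          intro p q hp hq
          rw [hiff3 p q hp hq]
          apply eqvgen_congr
          intro x y
      -- built relation ↔ edges of P ++ [s]
          rw [edgeIn_snoc_iff]
          constructor
          · rintro ((h | ⟨hx, hy⟩) | ⟨hx, hy⟩)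
            · exact Or.inl h
            · exact Or.inr ⟨(s.1 + 1, s.2), (edgeTo_s_iff hGd _).2 (Or.inl ⟨rfl, hc1⟩), hx, hy⟩
            · exact Or.inr ⟨(s.1, s.2 + 1), (edgeTo_s_iff hGd _).2 (Or.inr ⟨rfl, hc2⟩), hx, hy⟩
          · rintro (h | ⟨q', he, hx, hy⟩)
            · exact Or.inl (Or.inl h)
            · rcases (edgeTo_s_iff hGd _).1 he with ⟨rfl, _⟩ | ⟨rfl, _⟩
              · exact Or.inl (Or.inr ⟨hx, hy⟩)
              · exact Or.inr ⟨hx, hy⟩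
        · have hstep : Ustep g R C m n par s =
              unionB (n + 1) par (flatI C s) (flatI C (s.1 + 1, s.2)) := by
            simp only [Ustep, if_pos hm, if_pos hc1, if_neg hc2]
            rfl
          rw [hstep]
          apply ih (P ++ [s]) _ hP' hI2
          intro p q hp hq
          rw [hiff2 p q hp hq]
          apply eqvgen_congr
          intro x y
          rw [edgeIn_snoc_iff]
          constructor
          · rintro (h | ⟨hx, hy⟩)
            · exact Or.inl h
            · exact Or.inr ⟨(s.1 + 1, s.2), (edgeTo_s_iff hGd _).2 (Or.inl ⟨rfl, hc1⟩), hx, hy⟩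
          · rintro (h | ⟨q', he, hx, hy⟩)
            · exact Or.inl h
            · rcases (edgeTo_s_iff hGd _).1 he with ⟨rfl, _⟩ | ⟨rfl, hcc⟩
              · exact Or.inr ⟨hx, hy⟩
              · exact absurd hcc hc2
      · by_cases hc2 : s.2 + 1 < C ∧ mget g s.1 (s.2 + 1) 0 = m
        · have hGd2 : Gd g R C m (s.1, s.2 + 1) := ⟨hs.1, hs.2.1, by omega, hc2.1, hc2.2⟩
          obtain ⟨hI2, hiff2⟩ := rootiff_union hI hiff hGd hGd2 hn
          have hstep : Ustep g R C m n par s =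
              unionB (n + 1) par (flatI C s) (flatI C (s.1, s.2 + 1)) := by
            simp only [Ustep, if_pos hm, if_neg hc1, if_pos hc2]
            rw [e2]
            rfl
          rw [hstep]
          apply ih (P ++ [s]) _ hP' hI2
          intro p q hp hq
          rw [hiff2 p q hp hq]
          apply eqvgen_congr
          intro x y
          rw [edgeIn_snoc_iff]
          constructor
          · rintro (h | ⟨hx, hy⟩)
            · exact Or.inl h
            · exact Or.inr ⟨(s.1, s.2 + 1), (edgeTo_s_iff hGd _).2 (Or.inr ⟨rfl, hc2⟩), hx, hy⟩
          · rintro (h | ⟨q', he, hx, hy⟩)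
            · exact Or.inl h
            · rcases (edgeTo_s_iff hGd _).1 he with ⟨rfl, hcc⟩ | ⟨rfl, _⟩
              · exact absurd hcc hc1
              · exact Or.inr ⟨hx, hy⟩
        · have hstep : Ustep g R C m n par s = par := by
            simp only [Ustep, if_pos hm, if_neg hc1, if_neg hc2]
          rw [hstep]
          apply ih (P ++ [s]) _ hP' hI
          intro p q hp hq
          rw [hiff p q hp hq]
          apply eqvgen_congr
          intro x y
          rw [edgeIn_snoc_iff]
          constructor
          · exact Or.inl
          · rintro (h | ⟨q', he, hx, hy⟩)
            · exact h
            · rcases (edgeTo_s_iff hGd _).1 he with ⟨rfl, hcc⟩ | ⟨rfl, hcc⟩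
              · exact absurd hcc hc1
              · exact absurd hcc hc2
    · have hstep : Ustep g R C m n par s = par := by
        simp only [Ustep, if_neg hm]
      rw [hstep]
      apply ih (P ++ [s]) _ hP' hI
      intro p q hp hq
      rw [hiff p q hp hq]
      apply eqvgen_congr
      intro x y
      exact (edgeIn_snoc_not_gd (fun hg => hm hg.2.2.2.2) x y).symm

theorem PInv_init {R C : Int} {n : Nat} (hn : (n : Int) = R * C) :
    PInv n (PySem.List.pyRange 0 (R * C) 1) ∧
    ∀ i : Int, 0 ≤ i → i < (n : Int) → pget (PySem.List.pyRange 0 (R * C) 1) i = i := by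
  have hlen : (PySem.List.pyRange 0 (R * C) 1).length = n := by
    rw [PySem.List.length_pyRange_one]; omega
  have hself : ∀ i : Int, 0 ≤ i → i < (n : Int) →
      pget (PySem.List.pyRange 0 (R * C) 1) i = i := by
    intro i h0 hi
    unfold pget
    rw [PySem.List.pyGetD_eq_getElem _ _ h0 (by rw [hlen]; exact hi)]
    rw [PySem.List.getElem_pyRange_one]
    omega
  exact ⟨⟨hlen, fun i h0 hi => by rw [hself i h0 hi]; omega⟩, hself⟩

theorem DSU_final (g : List (List Int)) (R C m : Int) (n : Nat) (hn : (n : Int) = R * C) :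
    ∀ p q, Gd g R C m p → Gd g R C m q →
      (findB (n + 1) ((allCells R C).foldl (Ustep g R C m n) (PySem.List.pyRange 0 (R * C) 1))
          (flatI C p) =
        findB (n + 1) ((allCells R C).foldl (Ustep g R C m n) (PySem.List.pyRange 0 (R * C) 1))
          (flatI C q) ↔ Reach g R C m p q) := by
  obtain ⟨hI0, hself⟩ := PInv_init (R := R) (C := C) hn
  have hiff0 : ∀ p q, Gd g R C m p → Gd g R C m q →
      (rootD n (PySem.List.pyRange 0 (R * C) 1) (flatI C p) =
        rootD n (PySem.List.pyRange 0 (R * C) 1) (flatI C q) ↔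
        Relation.EqvGen (EdgeIn g R C m []) (flatI C p) (flatI C q)) := by
    intro p q hp hq
    have hbp := flat_bounds (R := R) ⟨hp.1, hp.2.1, hp.2.2.1, hp.2.2.2.1⟩
    have hbq := flat_bounds (R := R) ⟨hq.1, hq.2.1, hq.2.2.1, hq.2.2.2.1⟩
    rw [rootD_of_root (hself _ hbp.1 (by omega)), rootD_of_root (hself _ hbq.1 (by omega))]
    constructor
    · intro h
      have : p = q := flat_inj hp.2.2.1 hp.2.2.2.1 hq.2.2.1 hq.2.2.2.1 h
      rw [this]
      exact Relation.EqvGen.refl _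
    · intro h
      have hF : ∀ x y, EdgeIn g R C m ([] : List (Int × Int)) x y ↔ False := by
        intro x y
        constructor
        · rintro ⟨p', q', hmem, _⟩
          exact List.not_mem_nil hmem
        · exact False.elim
      exact eqvgen_false ((eqvgen_congr hF).1 h)
  obtain ⟨hIf, hifff⟩ := U_go g R C m n hn (allCells R C) [] (PySem.List.pyRange 0 (R * C) 1)
    rfl hI0 hiff0
  intro p q hp hq
  rw [show (findB (n + 1)
      ((allCells R C).foldl (Ustep g R C m n) (PySem.List.pyRange 0 (R * C) 1)) : Int → Int) =
      rootD n ((allCells R C).foldl (Ustep g R C m n) (PySem.List.pyRange 0 (R * C) 1)) from rfl]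
  rw [hifff p q hp hq]
  constructor
  · intro h
    rcases eqvgen_to_RF h with he | ⟨p', q', b1, b2, b3, b4, b5⟩
    · have : p = q := flat_inj hp.2.2.1 hp.2.2.2.1 hq.2.2.1 hq.2.2.2.1 he
      rw [this]
      exact Relation.ReflTransGen.refl
    · have hp' : p' = p := flat_inj b1.2.2.1 b1.2.2.2.1 hp.2.2.1 hp.2.2.2.1 b3.symm
      have hq' : q' = q := flat_inj b2.2.2.1 b2.2.2.2.1 hq.2.2.1 hq.2.2.2.1 b4.symm
      rw [← hp', ← hq']
      exact b5
  · intro h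
    exact reach_to_eqvgen
      (fun r hr => mem_allCells.2 ⟨hr.1, hr.2.1, hr.2.2.1, hr.2.2.2.1⟩) h

-- ----- the grouping pass of port B, one cell at a time -----
def Gstep (g : List (List Int)) (m : Int) (kf : (Int × Int) → Int)
    (d : PySem.Dict Int (List (Int × Int))) (p : Int × Int) :
    PySem.Dict Int (List (Int × Int)) :=
  if mget g p.1 p.2 0 = m then
    d.insert (kf p) (d.getD (kf p) [] ++ [(p.1, p.2)])
  else d

theorem gd_of_leader {g : List (List Int)} {R C m : Int} {l : Int × Int}
    (h : isLeaderB g R C m l = true) : Gd g R C m l := by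
  unfold isLeaderB at h
  rw [Bool.and_eq_true] at h
  exact of_decide_eq_true h.1

theorem leader_min {g : List (List Int)} {R C m : Int} {l : Int × Int}
    (h : isLeaderB g R C m l = true) :
    ∀ q ∈ classList g R C m l, flatI C l ≤ flatI C q := by
  unfold isLeaderB at h
  rw [Bool.and_eq_true] at h
  intro q hq
  exact of_decide_eq_true (List.all_eq_true.1 h.2 q hq)

theorem class_congr {g : List (List Int)} {R C m : Int} {s l : Int × Int}
    (hs : Gd g R C m s) (hl : Gd g R C m l) (hr : Reach g R C m s l) :
    ∀ q, q ∈ classList g R C m l ↔ q ∈ classList g R C m s := by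
  intro q
  rw [mem_classList hl q, mem_classList hs q]
  exact ⟨fun h => Relation.ReflTransGen.trans hr h,
    fun h => Relation.ReflTransGen.trans (reach_symm hr) h⟩

theorem leaders_same_class_eq {g : List (List Int)} {R C m : Int} {l1 l2 : Int × Int}
    (h1 : isLeaderB g R C m l1 = true) (h2 : isLeaderB g R C m l2 = true)
    (hr : Reach g R C m l1 l2) : l1 = l2 := by
  have hg1 := gd_of_leader h1
  have hg2 := gd_of_leader h2
  have ha : flatI C l1 ≤ flatI C l2 :=
    leader_min h1 l2 ((mem_classList hg1 l2).2 hr)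
  have hb : flatI C l2 ≤ flatI C l1 :=
    leader_min h2 l1 ((mem_classList hg2 l1).2 (reach_symm hr))
  exact flat_inj hg1.2.2.1 hg1.2.2.2.1 hg2.2.2.1 hg2.2.2.2.1 (by omega)

theorem exists_leader {g : List (List Int)} {R C m : Int} {s : Int × Int}
    (hGd : Gd g R C m s) :
    ∃ l, isLeaderB g R C m l = true ∧ Reach g R C m s l ∧ flatI C l ≤ flatI C s := by
  obtain ⟨l, hl⟩ : ∃ l, PySem.List.min? (classList g R C m s) (flatI C) = some l := by
    cases he : PySem.List.min? (classList g R C m s) (flatI C)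
    · exact absurd ((PySem.List.min?_eq_none_iff _ _).1 he) (classList_ne_nil hGd)
    · exact ⟨_, rfl⟩
  have hmem := PySem.List.min?_mem hl
  have hmin := PySem.List.min?_isMin hl
  have hre : Reach g R C m s l := (mem_classList hGd l).1 hmem
  have hgl : Gd g R C m l := reach_good hGd hre
  refine ⟨l, ?_, hre, hmin s ((mem_classList hGd s).2 Relation.ReflTransGen.refl)⟩
  unfold isLeaderB
  rw [Bool.and_eq_true]
  refine ⟨decide_eq_true hgl, List.all_eq_true.2 ?_⟩
  intro q hq
  exact decide_eq_true (hmin q ((class_congr hGd hgl hre q).1 hq))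

theorem G_go (g : List (List Int)) (R C m : Int) (kf : (Int × Int) → Int)
    (hk : ∀ p q, Gd g R C m p → Gd g R C m q → (kf p = kf q ↔ Reach g R C m p q)) :
    ∀ (rest P : List (Int × Int)) (d : PySem.Dict Int (List (Int × Int))),
    P ++ rest = allCells R C →
    d.items = (P.filter (isLeaderB g R C m)).map
      (fun l => (kf l, P.filter (fun q => decide (q ∈ classList g R C m l)))) →
    (rest.foldl (Gstep g m kf) d).items
      = ((allCells R C).filter (isLeaderB g R C m)).map
          (fun l => (kf l, (allCells R C).filter (fun q => decide (q ∈ classList g R C m l)))) := by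
  intro rest
  induction rest with
  | nil =>
    intro P d hP hd
    rw [List.append_nil] at hP
    subst hP
    simpa using hd
  | cons s rest ih =>
    intro P d hP hd
    obtain ⟨hsAll, hbefore, hcover⟩ := scan_prefix hP
    have hs := mem_allCells.1 hsAll
    have hPnd : P.Nodup := by
      have := nodup_allCells R C
      rw [← hP] at this
      exact (List.nodup_append.1 this).1
    have hP' : (P ++ [s]) ++ rest = allCells R C := by
      rw [List.append_assoc]; exact hP
    simp only [List.foldl_cons]
    have hkeyinj : ∀ l1 ∈ P.filter (isLeaderB g R C m), ∀ l2 ∈ P.filter (isLeaderB g R C m),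
        kf l1 = kf l2 → l1 = l2 := by
      intro l1 hl1 l2 hl2 hkey
      have h1 := (List.mem_filter.1 hl1).2
      have h2 := (List.mem_filter.1 hl2).2
      exact leaders_same_class_eq h1 h2
        ((hk l1 l2 (gd_of_leader h1) (gd_of_leader h2)).1 hkey)
    have hkeys : d.keys = (P.filter (isLeaderB g R C m)).map kf := by
      show d.items.map (·.1) = _
      rw [hd, List.map_map]
      rfl
    have hknd : d.keys.Nodup := by
      rw [hkeys]
      exact List.Nodup.map_on hkeyinj (hPnd.filter _)
    by_cases hm : mget g s.1 s.2 0 = m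
    · have hGd : Gd g R C m s := ⟨hs.1, hs.2.1, hs.2.2.1, hs.2.2.2, hm⟩
      by_cases hearlier : ∃ t ∈ P, Gd g R C m t ∧ Reach g R C m t s
      · -- s joins an existing group: its class leader is already a key
        obtain ⟨t, htP, htG, htR⟩ := hearlier
        obtain ⟨l0, hl0lead, hl0re, _⟩ := exists_leader hGd
        have hl0g := gd_of_leader hl0lead
        have hl0P : l0 ∈ P := by
          have htc : t ∈ classList g R C m l0 :=
            (mem_classList hl0g t).2
              (Relation.ReflTransGen.trans (reach_symm hl0re) (reach_symm htR))
          have hle : flatI C l0 ≤ flatI C t := leader_min hl0lead t htc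
          have := hbefore t htP
          exact hcover l0 (mem_allCells.2 ⟨hl0g.1, hl0g.2.1, hl0g.2.2.1, hl0g.2.2.2.1⟩)
            (by omega)
        have hl0f : l0 ∈ P.filter (isLeaderB g R C m) := List.mem_filter.2 ⟨hl0P, hl0lead⟩
        have hkey0 : kf s = kf l0 := (hk s l0 hGd hl0g).2 hl0re
        have hsnotlead : isLeaderB g R C m s = false := by
          unfold isLeaderB
          rw [Bool.and_eq_false_iff]
          right
          rw [List.all_eq_false]
          refine ⟨t, (mem_classList hGd t).2 (reach_symm htR), ?_⟩
          have := hbefore t htP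
          simp only [decide_eq_true_eq]
          omega
        have hmempair : (kf l0, P.filter (fun q => decide (q ∈ classList g R C m l0))) ∈ d.items := by
          rw [hd]
          exact List.mem_map.2 ⟨l0, hl0f, rfl⟩
        have hcont : d.contains (kf s) = true := by
          rw [hkey0]
          exact (PySem.Dict.contains_iff_mem_keys _ _).2 (by
            rw [hkeys]
            exact List.mem_map.2 ⟨l0, hl0f, rfl⟩)
        have hgetD : d.getD (kf s) [] = P.filter (fun q => decide (q ∈ classList g R C m l0)) := by
          rw [hkey0]
          exact PySem.Dict.getD_of_mem_items _ hmempair hknd []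
        have hstep : (Gstep g m kf d s).items =
            d.items.map (fun pr => if (pr.1 == kf s) = true then
              (kf s, P.filter (fun q => decide (q ∈ classList g R C m l0)) ++ [s]) else pr) := by
          unfold Gstep
          rw [if_pos hm]
          rw [PySem.Dict.items_insert_of_contains _ _ hcont, hgetD]
        apply ih (P ++ [s]) _ hP'
        rw [hstep, hd, List.map_map, List.filter_append, List.filter_singleton, hsnotlead]
        simp only [Bool.cond_false, List.append_nil]
        apply List.map_congr_left
        intro l hl
        have hllead := (List.mem_filter.1 hl).2
        have hlg := gd_of_leader hllead
        by_cases hleq : l = l0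
        · subst hleq
          have hbeq : (kf l == kf s) = true := beq_iff_eq.2 hkey0.symm
          show (if (kf l == kf s) = true
              then (kf s, List.filter (fun q => decide (q ∈ classList g R C m l)) P ++ [s])
              else (kf l, List.filter (fun q => decide (q ∈ classList g R C m l)) P))
            = (kf l, List.filter (fun q => decide (q ∈ classList g R C m l)) (P ++ [s]))
          rw [if_pos hbeq, List.filter_append, List.filter_singleton,
            decide_eq_true ((mem_classList hlg s).2 (reach_symm hl0re))]
          simp only [Bool.cond_true]
          rw [hkey0]
        · have hbne : (kf l == kf s) = false := by
            rw [beq_eq_false_iff_ne]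
            intro hke
            exact hleq (hkeyinj l hl l0 hl0f (hke.trans hkey0))
          show (if (kf l == kf s) = true
              then (kf s, List.filter (fun q => decide (q ∈ classList g R C m l0)) P ++ [s])
              else (kf l, List.filter (fun q => decide (q ∈ classList g R C m l)) P))
            = (kf l, List.filter (fun q => decide (q ∈ classList g R C m l)) (P ++ [s]))
          rw [if_neg (by simp [hbne]), List.filter_append, List.filter_singleton]
          rw [decide_eq_false (fun hmem => by
            have hre : Reach g R C m l s := (mem_classList hlg s).1 hmem
            exact hleq (hkeyinj l hl l0 hl0f (((hk l s hlg hGd).2 hre).trans hkey0)))]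
          simp only [Bool.cond_false, List.append_nil]
      · -- s starts a new group: it is the leader of a fresh class
        have hslead : isLeaderB g R C m s = true := by
          unfold isLeaderB
          rw [Bool.and_eq_true]
          refine ⟨decide_eq_true hGd, List.all_eq_true.2 ?_⟩
          intro q hq
          have hre := (mem_classList hGd q).1 hq
          have hgq : Gd g R C m q := reach_good hGd hre
          simp only [decide_eq_true_eq]
          by_contra hflat
          exact hearlier ⟨q, hcover q
            (mem_allCells.2 ⟨hgq.1, hgq.2.1, hgq.2.2.1, hgq.2.2.2.1⟩) (by omega),
            hgq, reach_symm hre⟩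
        have hcont : d.contains (kf s) = false := by
          rw [← Bool.not_eq_true]
          intro hc
          have := (PySem.Dict.contains_iff_mem_keys _ _).1 hc
          rw [hkeys] at this
          obtain ⟨l, hlf, hkl⟩ := List.mem_map.1 this
          have hllead := (List.mem_filter.1 hlf).2
          exact hearlier ⟨l, (List.mem_filter.1 hlf).1, gd_of_leader hllead,
            (hk l s (gd_of_leader hllead) hGd).1 hkl⟩
        have hstep : (Gstep g m kf d s).items = d.items ++ [(kf s, [s])] := by
          unfold Gstep
          rw [if_pos hm]
          rw [PySem.Dict.items_insert_of_not_contains _ _ hcont,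
            PySem.Dict.getD_of_not_contains _ [] hcont]
          rfl
        apply ih (P ++ [s]) _ hP'
        rw [hstep, hd, List.filter_append, List.filter_singleton, hslead]
        simp only [Bool.cond_true]
        rw [List.map_append]
        congr 1
        · apply List.map_congr_left
          intro l hl
          have hllead := (List.mem_filter.1 hl).2
          have hlg := gd_of_leader hllead
          rw [List.filter_append, List.filter_singleton]
          rw [decide_eq_false (fun hmem => hearlier ⟨l, (List.mem_filter.1 hl).1, hlg,
            (mem_classList hlg s).1 hmem⟩)]
          simp only [Bool.cond_false, List.append_nil]
        · simp only [List.map_cons, List.map_nil]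
          rw [List.filter_append, List.filter_singleton,
            decide_eq_true ((mem_classList hGd s).2 Relation.ReflTransGen.refl)]
          simp only [Bool.cond_true]
          rw [List.filter_eq_nil_iff.2 (by
            intro q hq
            simp only [decide_eq_true_eq]
            intro hmem
            have hre := (mem_classList hGd q).1 hmem
            exact hearlier ⟨q, hq, reach_good hGd hre, reach_symm hre⟩)]
          rfl
    · have hstep : Gstep g m kf d s = d := by
        unfold Gstep
        rw [if_neg hm]
      rw [hstep]
      apply ih (P ++ [s]) _ hP'
      rw [hd]
      have hnl : isLeaderB g R C m s = false := by
        unfold isLeaderB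
        rw [Bool.and_eq_false_iff]
        exact Or.inl (decide_eq_false (fun hg => hm hg.2.2.2.2))
      rw [List.filter_append, List.filter_singleton, hnl]
      simp only [Bool.cond_false, List.append_nil]
      apply List.map_congr_left
      intro l hl
      have hlg := gd_of_leader (List.mem_filter.1 hl).2
      rw [List.filter_append, List.filter_singleton]
      rw [decide_eq_false (fun hmem =>
        hm (reach_good hlg ((mem_classList hlg s).1 hmem)).2.2.2.2)]
      simp only [Bool.cond_false, List.append_nil]

-- ----- the two ports, restated with named stages (definitionally equal to the ports) -----
def countsD (g : List (List Int)) (R C : Int) : PySem.Dict Int Int :=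
  (PySem.List.pyRange 0 R 1).foldl (fun d r =>
    (PySem.List.pyRange 0 C 1).foldl (fun d c =>
      d.insert (mget g r c 0) (d.getD (mget g r c 0) 0 + 1)) d) PySem.Dict.empty

def colorsL (g : List (List Int)) (R C : Int) : List Int :=
  PySem.List.sorted (countsD g R C).keys (fun x => -((countsD g R C).getD x 0)) false

def fABody (t : Int) (res : List (List Int)) (box : Int × Int × Int × Int) :
    List (List Int) :=
  (PySem.List.pyRange box.1 (box.2.1 + 1) 1).foldl (fun res r =>
    (PySem.List.pyRange box.2.2.1 (box.2.2.2 + 1) 1).foldl (fun res c =>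
      if mget res r c 0 = t then mset res r c 0 else res) res) res

def fBBody (t : Int) (res : List (List Int)) (cells : List (Int × Int)) :
    List (List Int) :=
  let minR := (PySem.List.min? (cells.map Prod.fst) (fun y => y)).getD 0
  let maxR := (PySem.List.max? (cells.map Prod.fst) (fun y => y)).getD 0
  let minC := (PySem.List.min? (cells.map Prod.snd) (fun y => y)).getD 0
  let maxC := (PySem.List.max? (cells.map Prod.snd) (fun y => y)).getD 0
  (PySem.List.pyRange minR (maxR + 1) 1).foldl (fun res r =>
    (PySem.List.pyRange minC (maxC + 1) 1).foldl (fun res c =>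
      if mget res r c 0 = t then mset res r c 0 else res) res) res

theorem fbody_eq (t : Int) (acc : List (List Int)) (cells : List (Int × Int)) :
    fBBody t acc cells = fABody t acc (boxTuple cells) := rfl

def fillA (g : List (List Int)) (R C m t : Int) : List (List Int) :=
  (((PySem.List.pyRange 0 R 1).foldl (fun st r =>
      (PySem.List.pyRange 0 C 1).foldl (fun st c =>
        if mget g r c 0 = m ∧ mget st.1 r c false = false then
          let fc := floodA g R C m (4 * R.toNat * C.toNat + 2) st.1 [] [(r, c)]
          if fc.2 ≠ [] then
            (fc.1, st.2 ++ [(((PySem.List.min? (fc.2.map Prod.fst) (fun y => y)).getD 0,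
                              (PySem.List.max? (fc.2.map Prod.fst) (fun y => y)).getD 0,
                              (PySem.List.min? (fc.2.map Prod.snd) (fun y => y)).getD 0,
                              (PySem.List.max? (fc.2.map Prod.snd) (fun y => y)).getD 0) :
                              Int × Int × Int × Int)])
          else (fc.1, st.2)
        else st) st)
      ((List.replicate R.toNat (List.replicate C.toNat false), []) :
        List (List Bool) × List (Int × Int × Int × Int))).2).foldl (fABody t) g

def fillB (g : List (List Int)) (R C m t : Int) : List (List Int) :=
  let n : Nat := (R * C).toNat
  let par := (PySem.List.pyRange 0 R 1).foldl (fun par r =>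
      (PySem.List.pyRange 0 C 1).foldl (fun par c =>
        if mget g r c 0 = m then
          let par := if r + 1 < R ∧ mget g (r + 1) c 0 = m
                     then unionB (n + 1) par (r * C + c) ((r + 1) * C + c) else par
          if c + 1 < C ∧ mget g r (c + 1) 0 = m
          then unionB (n + 1) par (r * C + c) (r * C + c + 1) else par
        else par) par)
      (PySem.List.pyRange 0 (R * C) 1)
  let groups : PySem.Dict Int (List (Int × Int)) :=
    (PySem.List.pyRange 0 R 1).foldl (fun g2 r =>
      (PySem.List.pyRange 0 C 1).foldl (fun g2 c =>
        if mget g r c 0 = m then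
          g2.insert (findB (n + 1) par (r * C + c))
            (g2.getD (findB (n + 1) par (r * C + c)) [] ++ [(r, c)])
        else g2) g2) PySem.Dict.empty
  groups.values.foldl (fBBody t) g

theorem transform_eq (grid : List (List Int)) :
    transform grid =
      if (colorsL grid grid.length (PySem.List.pyGetD grid 0 []).length).length < 3 then grid
      else fillA grid grid.length (PySem.List.pyGetD grid 0 []).length
        (PySem.List.pyGetD (colorsL grid grid.length (PySem.List.pyGetD grid 0 []).length) 2 0)
        (PySem.List.pyGetD (colorsL grid grid.length (PySem.List.pyGetD grid 0 []).length) 1 0) :=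
  rfl

theorem transform_alt_eq (grid : List (List Int)) :
    transform_alt grid =
      if (colorsL grid grid.length (PySem.List.pyGetD grid 0 []).length).length < 3 then grid
      else fillB grid grid.length (PySem.List.pyGetD grid 0 []).length
        (PySem.List.pyGetD (colorsL grid grid.length (PySem.List.pyGetD grid 0 []).length) 2 0)
        (PySem.List.pyGetD (colorsL grid grid.length (PySem.List.pyGetD grid 0 []).length) 1 0) :=
  rfl

theorem foldl_id {α β : Type} (l : List β) (s : α) : l.foldl (fun s _ => s) s = s := by
  induction l generalizing s with
  | nil => rfl
  | cons a tl ih => exact ih s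

theorem colors_pos (g : List (List Int)) (R C : Int)
    (h : ¬ (colorsL g R C).length < 3) : 0 < R ∧ 0 < C := by
  by_contra hcon
  apply h
  have hRC : R ≤ 0 ∨ C ≤ 0 := by omega
  have hempty : countsD g R C = PySem.Dict.empty := by
    unfold countsD
    rcases hRC with hR | hC
    · rw [PySem.List.pyRange_one_eq_nil hR]
      rfl
    · simp only [PySem.List.pyRange_one_eq_nil hC, List.foldl_nil]
      exact foldl_id _ _
  unfold colorsL
  rw [hempty]
  decide

theorem fillAB (g : List (List Int)) (R C m t : Int) (hR : 0 < R) (hC : 0 < C) :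
    fillA g R C m t = fillB g R C m t := by
  have hn : (((R * C).toNat : Nat) : Int) = R * C :=
    Int.toNat_of_nonneg (mul_nonneg (by omega) (by omega))
  have hA : (PySem.List.pyRange 0 R 1).foldl (fun st r =>
      (PySem.List.pyRange 0 C 1).foldl (fun st c =>
        if mget g r c 0 = m ∧ mget st.1 r c false = false then
          let fc := floodA g R C m (4 * R.toNat * C.toNat + 2) st.1 [] [(r, c)]
          if fc.2 ≠ [] then
            (fc.1, st.2 ++ [(((PySem.List.min? (fc.2.map Prod.fst) (fun y => y)).getD 0,
                              (PySem.List.max? (fc.2.map Prod.fst) (fun y => y)).getD 0,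
                              (PySem.List.min? (fc.2.map Prod.snd) (fun y => y)).getD 0,
                              (PySem.List.max? (fc.2.map Prod.snd) (fun y => y)).getD 0) :
                              Int × Int × Int × Int)])
          else (fc.1, st.2)
        else st) st)
      ((List.replicate R.toNat (List.replicate C.toNat false), []) :
        List (List Bool) × List (Int × Int × Int × Int))
      = (allCells R C).foldl (Astep g R C m) (vizInit R C, []) :=
    foldl_foldl_prod (Astep g R C m) _ _ _
  have hU : (PySem.List.pyRange 0 R 1).foldl (fun par r =>
      (PySem.List.pyRange 0 C 1).foldl (fun par c =>
        if mget g r c 0 = m then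
          let par := if r + 1 < R ∧ mget g (r + 1) c 0 = m
                     then unionB ((R * C).toNat + 1) par (r * C + c) ((r + 1) * C + c) else par
          if c + 1 < C ∧ mget g r (c + 1) 0 = m
          then unionB ((R * C).toNat + 1) par (r * C + c) (r * C + c + 1) else par
        else par) par)
      (PySem.List.pyRange 0 (R * C) 1)
      = (allCells R C).foldl (Ustep g R C m (R * C).toNat) (PySem.List.pyRange 0 (R * C) 1) :=
    foldl_foldl_prod (Ustep g R C m (R * C).toNat) _ _ _
  have hG : (PySem.List.pyRange 0 R 1).foldl (fun g2 r =>
      (PySem.List.pyRange 0 C 1).foldl (fun g2 c =>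
        if mget g r c 0 = m then
          g2.insert (findB ((R * C).toNat + 1)
              ((allCells R C).foldl (Ustep g R C m (R * C).toNat)
                (PySem.List.pyRange 0 (R * C) 1)) (r * C + c))
            (g2.getD (findB ((R * C).toNat + 1)
              ((allCells R C).foldl (Ustep g R C m (R * C).toNat)
                (PySem.List.pyRange 0 (R * C) 1)) (r * C + c)) [] ++ [(r, c)])
        else g2) g2) PySem.Dict.empty
      = (allCells R C).foldl (Gstep g m (fun p => findB ((R * C).toNat + 1)
          ((allCells R C).foldl (Ustep g R C m (R * C).toNat)
            (PySem.List.pyRange 0 (R * C) 1)) (p.1 * C + p.2))) PySem.Dict.empty :=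
    foldl_foldl_prod (Gstep g m (fun p => findB ((R * C).toNat + 1)
      ((allCells R C).foldl (Ustep g R C m (R * C).toNat)
        (PySem.List.pyRange 0 (R * C) 1)) (p.1 * C + p.2))) _ _ _
  have hk : ∀ p q, Gd g R C m p → Gd g R C m q →
      ((fun p => findB ((R * C).toNat + 1)
          ((allCells R C).foldl (Ustep g R C m (R * C).toNat)
            (PySem.List.pyRange 0 (R * C) 1)) (p.1 * C + p.2)) p =
        (fun p => findB ((R * C).toNat + 1)
          ((allCells R C).foldl (Ustep g R C m (R * C).toNat)
            (PySem.List.pyRange 0 (R * C) 1)) (p.1 * C + p.2)) q ↔ Reach g R C m p q) :=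
    fun p q hp hq => DSU_final g R C m (R * C).toNat hn p q hp hq
  have hitems := G_go g R C m _ hk (allCells R C) [] PySem.Dict.empty rfl (by rfl)
  simp only [fillA, fillB]
  rw [hA, A_fold_eq g R C m, hU, hG]
  simp only [PySem.Dict.values]
  rw [hitems, List.map_map, List.foldl_map, List.foldl_map]
  simp only [leadersL]
  apply PySem.List.foldl_congr_mem
  intro acc l hl
  have hGdl : Gd g R C m l := gd_of_leader (List.mem_filter.1 hl).2
  have hbox : classBox g R C m l =
      boxTuple (List.filter (fun q => decide (q ∈ classList g R C m l)) (allCells R C)) := by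
    apply boxTuple_congr (classList_ne_nil hGdl)
    intro q
    rw [List.mem_filter]
    constructor
    · intro hq
      have hgq := reach_good hGdl ((mem_classList hGdl q).1 hq)
      exact ⟨mem_allCells.2 ⟨hgq.1, hgq.2.1, hgq.2.2.1, hgq.2.2.2.1⟩, decide_eq_true hq⟩
    · rintro ⟨_, hq⟩
      exact of_decide_eq_true hq
  show fABody t acc (classBox g R C m l) =
    fBBody t acc (List.filter (fun q => decide (q ∈ classList g R C m l)) (allCells R C))
  rw [fbody_eq, hbox]

-- ===== VERDICT (by name: the statement is the Claim_ definition above) =====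
theorem transform_spec : Claim_equal_transform := by
  unfold Claim_equal_transform
  intro grid _ _
  unfold Spec_transform
  rw [transform_eq grid, transform_alt_eq grid]
  by_cases hlen :
      (colorsL grid grid.length (PySem.List.pyGetD grid 0 []).length).length < 3
  · rw [if_pos hlen, if_pos hlen]
  · rw [if_neg hlen, if_neg hlen]
    obtain ⟨hR, hC⟩ := colors_pos _ _ _ hlen
    exact fillAB grid _ _ _ _ hR hC
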